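-- pv_equiv track=rewrite | github.com/pdh9523/TIL_hub | Algorithm/programmers/pg_1829.py | Solution
-- ===== SOURCE A (Python) =====
-- from collections import deque
--
-- dr = (1,0),(0,1),(-1,0),(0,-1)
--
-- def Solution(m,n,picture):
--     answer = [0,0]
--     numberOfArea = 0
--     maxSizeOfOneArea = 0
--     visit = [[0]*n for _ in range(m)]
--
--     for i in range(m):
--         for j in range(n):
--             if picture[i][j] !=0 and not visit[i][j]:
--                 target = picture[i][j]
--                 q = deque([(i,j)])
--                 visit[i][j] = 1
--                 cnt = 1
--                 while q:
--                     x,y = q.popleft()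
--
--                     for dx,dy in dr:
--                         di,dj = x+dx, y+dy
--                         if 0<=di<m and 0<=dj<n and not visit[di][dj] and picture[di][dj]==target:
--                             cnt += 1
--                             visit[di][dj] = 1
--                             q.append((di,dj))
--                 maxSizeOfOneArea = max(maxSizeOfOneArea, cnt)
--                 numberOfArea+=1
--
--     answer[0] = numberOfArea
--     answer[1] = maxSizeOfOneArea
--     return answer
-- ===== SOURCE B (Python) =====
-- def Solution(m, n, picture):
--     # Union-find over cell indices i*n+j: union equal-valued right/down
--     # neighbours, then count distinct roots and the largest class.
--     total = max(m, 0) * max(n, 0)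
--     parent = list(range(total))
--     size = [1] * total
--
--     def find(x):
--         while parent[x] != x:
--             x = parent[x]
--         return x
--
--     def union(a, b):
--         ra, rb = find(a), find(b)
--         if ra == rb:
--             return
--         if size[ra] < size[rb]:
--             ra, rb = rb, ra
--         parent[rb] = ra
--         size[ra] += size[rb]
--
--     for i in range(m):
--         for j in range(n):
--             v = picture[i][j]
--             if v == 0:
--                 continue
--             if j + 1 < n and picture[i][j + 1] == v:
--                 union(i * n + j, i * n + j + 1)
--             if i + 1 < m and picture[i + 1][j] == v:
--                 union(i * n + j, (i + 1) * n + j)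
--
--     counts = {}
--     for i in range(m):
--         for j in range(n):
--             if picture[i][j] != 0:
--                 r = find(i * n + j)
--                 counts[r] = counts.get(r, 0) + 1
--
--     return [len(counts), max(counts.values()) if counts else 0]
-- ===== Notes on version B (the rewrite author's own statement) =====
-- stated objective: alternative
-- what changed: Replaces the per-cell BFS flood fill (deque + shared visit matrix, counting while traversing) by a union-find over flat cell indices: union equal-valued right/down neighbours, then one pass collecting distinct roots and per-root cell counts.
import Mathlib
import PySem

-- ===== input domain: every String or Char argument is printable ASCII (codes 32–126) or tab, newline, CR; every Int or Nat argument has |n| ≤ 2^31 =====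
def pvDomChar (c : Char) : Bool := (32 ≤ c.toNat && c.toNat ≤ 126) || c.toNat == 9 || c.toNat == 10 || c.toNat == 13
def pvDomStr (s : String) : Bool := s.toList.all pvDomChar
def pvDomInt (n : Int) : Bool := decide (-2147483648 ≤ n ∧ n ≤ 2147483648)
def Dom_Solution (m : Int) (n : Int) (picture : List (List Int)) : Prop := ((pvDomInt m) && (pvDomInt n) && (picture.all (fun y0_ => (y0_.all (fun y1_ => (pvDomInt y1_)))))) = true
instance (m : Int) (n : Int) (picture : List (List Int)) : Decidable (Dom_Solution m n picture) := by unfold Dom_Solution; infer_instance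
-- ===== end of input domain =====

-- B replaces A's per-cell BFS flood fill (deque + visit matrix) by a union-find
-- over cell indices with a final root-counting pass: same outputs, a genuinely
-- different algorithm of similar cost ("alternative"); A mutates nothing observable.

-- ===== PORT A =====

/-- `picture[i][j]` (indices are provably in range in every execution inside `Pre_`). -/
def pvGet (xss : List (List Int)) (i j : Int) : Int :=
  PySem.List.pyGetD (PySem.List.pyGetD xss i []) j 0

/-- `visit[i][j] = v` (in-range in every execution inside `Pre_`). -/
def pvSet2 (xss : List (List Int)) (i j v : Int) : List (List Int) :=
  PySem.List.pySetD xss i (PySem.List.pySetD (PySem.List.pyGetD xss i []) j v)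

/-- the module constant `dr`. -/
def pvDR : List (Int × Int) := [(1, 0), (0, 1), (-1, 0), (0, -1)]

/-- A's inner `while q:` BFS loop; state `(q, visit, cnt)`; fuel only makes it total
    (one unit per iteration; never exhausted in the executions the claim covers). -/
def pvBFS (picture : List (List Int)) (m n target : Int) :
    Nat → List (Int × Int) → List (List Int) → Int → List (List Int) × Int
  | 0, _, visit, cnt => (visit, cnt)
  | _ + 1, [], visit, cnt => (visit, cnt)
  | fuel + 1, (x, y) :: q, visit, cnt =>
      let st := pvDR.foldl (fun (st : List (List Int) × Int × List (Int × Int)) d =>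
        let di := x + d.1
        let dj := y + d.2
        if 0 ≤ di ∧ di < m ∧ 0 ≤ dj ∧ dj < n ∧ pvGet st.1 di dj = 0 ∧
            pvGet picture di dj = target then
          (pvSet2 st.1 di dj 1, st.2.1 + 1, st.2.2 ++ [(di, dj)])
        else st) (visit, cnt, q)
      pvBFS picture m n target fuel st.2.2 st.1 st.2.1

/-- body of A's double `for` loop; state `(visit, numberOfArea, maxSizeOfOneArea)`. -/
def pvScanStep (picture : List (List Int)) (m n : Int)
    (st : List (List Int) × Int × Int) (i j : Int) : List (List Int) × Int × Int :=
  if pvGet picture i j ≠ 0 ∧ pvGet st.1 i j = 0 then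
    let target := pvGet picture i j
    let visit1 := pvSet2 st.1 i j 1
    let r := pvBFS picture m n target (m.toNat * n.toNat + 1) [(i, j)] visit1 1
    (r.1, st.2.1 + 1, max st.2.2 r.2)
  else st

def Solution (m : Int) (n : Int) (picture : List (List Int)) : List Int :=
  let init : List (List Int) × Int × Int :=
    ((PySem.List.pyRange 0 m 1).map (fun _ => List.replicate n.toNat 0), 0, 0)
  let fin := (PySem.List.pyRange 0 m 1).foldl
    (fun st i => (PySem.List.pyRange 0 n 1).foldl
      (fun st j => pvScanStep picture m n st i j) st) init
  [fin.2.1, fin.2.2]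

-- ===== PORT B =====

/-- `l[x]` on a flat int list (in-range in every execution inside `Pre_`). -/
def pvIGet (l : List Int) (x : Int) : Int := PySem.List.pyGetD l x 0

/-- `l[x] = v`. -/
def pvISet (l : List Int) (x v : Int) : List Int := PySem.List.pySetD l x v

/-- Source B's `find`: follow parents to the root (fuel only makes the `while` total;
    never exhausted in the executions the claim covers). -/
def pvFind (parent : List Int) : Nat → Int → Int
  | 0, x => x
  | fuel + 1, x =>
      if pvIGet parent x ≠ x then pvFind parent fuel (pvIGet parent x) else x

/-- Source B's `union` on state `(parent, size)`, union by size. -/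
def pvUnion (total : Int) (st : List Int × List Int) (a b : Int) : List Int × List Int :=
  let ra := pvFind st.1 (total.toNat + 1) a
  let rb := pvFind st.1 (total.toNat + 1) b
  if ra = rb then st
  else
    let p := if pvIGet st.2 ra < pvIGet st.2 rb then (rb, ra) else (ra, rb)
    (pvISet st.1 p.2 p.1, pvISet st.2 p.1 (pvIGet st.2 p.1 + pvIGet st.2 p.2))

/-- body of Source B's first double loop: union right/down equal-valued neighbours. -/
def pvUnionStep (picture : List (List Int)) (m n total : Int)
    (st : List Int × List Int) (i j : Int) : List Int × List Int :=
  let v := pvGet picture i j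
  if v = 0 then st
  else
    let st1 := if j + 1 < n ∧ pvGet picture i (j + 1) = v then
        pvUnion total st (i * n + j) (i * n + j + 1) else st
    if i + 1 < m ∧ pvGet picture (i + 1) j = v then
      pvUnion total st1 (i * n + j) ((i + 1) * n + j) else st1

def Solution_alt (m : Int) (n : Int) (picture : List (List Int)) : List Int :=
  let total := max m 0 * max n 0
  let init : List Int × List Int :=
    (PySem.List.pyRange 0 total 1, List.replicate total.toNat 1)
  let uf := (PySem.List.pyRange 0 m 1).foldl
    (fun st i => (PySem.List.pyRange 0 n 1).foldl
      (fun st j => pvUnionStep picture m n total st i j) st) init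
  let counts := (PySem.List.pyRange 0 m 1).foldl
    (fun d i => (PySem.List.pyRange 0 n 1).foldl
      (fun (d : PySem.Dict Int Int) j =>
        if pvGet picture i j ≠ 0 then
          d.modify (pvFind uf.1 (total.toNat + 1) (i * n + j)) 0 (· + 1)
        else d) d) PySem.Dict.empty
  [(counts.size : Int),
   match PySem.List.max? counts.values (fun v => v) with
   | some v => v
   | none => 0]

-- ===== PRECONDITION & SPEC =====

-- Pre_ excludes exactly the inputs on which the Python A raises IndexError:
-- when both loop bounds are positive, `picture` must have at least m rows and
-- each of its first m rows at least n entries.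
def Pre_Solution (m : Int) (n : Int) (picture : List (List Int)) : Prop :=
  0 < m → 0 < n →
    (m ≤ (picture.length : Int) ∧
      ∀ row ∈ picture.take m.toNat, n ≤ (row.length : Int))
instance (m : Int) (n : Int) (picture : List (List Int)) :
    Decidable (Pre_Solution m n picture) := by unfold Pre_Solution; infer_instance

def pvWitness_Solution : Int × Int × List (List Int) := (2, 3, [[1, 1, 0], [0, 1, 2]])

def Spec_Solution (m : Int) (n : Int) (picture : List (List Int)) (out : List Int) : Prop := out = Solution_alt m n picture
instance (m : Int) (n : Int) (picture : List (List Int)) (out : List Int) : Decidable (Spec_Solution m n picture out) := by unfold Spec_Solution; infer_instance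

-- ===== CLAIM (what is proved, stated in full; the proofs are below) =====
def Claim_equal_Solution : Prop := ∀ (m : Int) (n : Int) (picture : List (List Int)), Dom_Solution m n picture → Pre_Solution m n picture → Spec_Solution m n picture (Solution m n picture)

-- ===== LEMMAS AND PROOFS =====

/-! ### Shared theory: the same-value adjacency graph of the grid -/

def pvInB (m n : Int) (p : Int × Int) : Prop :=
  0 ≤ p.1 ∧ p.1 < m ∧ 0 ≤ p.2 ∧ p.2 < n

def pvE (m n : Int) (picture : List (List Int)) (p q : Int × Int) : Prop :=
  pvInB m n p ∧ pvInB m n q ∧ pvGet picture p.1 p.2 ≠ 0 ∧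
  pvGet picture q.1 q.2 = pvGet picture p.1 p.2 ∧
  ((q.1 = p.1 + 1 ∧ q.2 = p.2) ∨ (q.1 = p.1 ∧ q.2 = p.2 + 1) ∨
   (q.1 = p.1 - 1 ∧ q.2 = p.2) ∨ (q.1 = p.1 ∧ q.2 = p.2 - 1))

def pvReach (m n : Int) (picture : List (List Int)) : Int × Int → Int × Int → Prop :=
  Relation.ReflTransGen (pvE m n picture)

def pvComp (m n : Int) (picture : List (List Int)) (p : Int × Int) : Set (Int × Int) :=
  {q | pvReach m n picture p q}

theorem pvE_symm {m n : Int} {picture : List (List Int)} {p q : Int × Int}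
    (h : pvE m n picture p q) : pvE m n picture q p := by
  obtain ⟨hp, hq, h0, hv, hd⟩ := h
  refine ⟨hq, hp, by rw [hv]; exact h0, by rw [hv], ?_⟩
  rcases hd with ⟨h1, h2⟩ | ⟨h1, h2⟩ | ⟨h1, h2⟩ | ⟨h1, h2⟩
  · exact Or.inr (Or.inr (Or.inl ⟨by omega, by omega⟩))
  · exact Or.inr (Or.inr (Or.inr ⟨by omega, by omega⟩))
  · exact Or.inl ⟨by omega, by omega⟩
  · exact Or.inr (Or.inl ⟨by omega, by omega⟩)

theorem pvReach_symm {m n : Int} {picture : List (List Int)} {p q : Int × Int}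
    (h : pvReach m n picture p q) : pvReach m n picture q p := by
  induction h with
  | refl => exact Relation.ReflTransGen.refl
  | tail _ hE ih =>
      exact Relation.ReflTransGen.trans (Relation.ReflTransGen.single (pvE_symm hE)) ih

theorem pvReach_trans {m n : Int} {picture : List (List Int)} {p q r : Int × Int}
    (h1 : pvReach m n picture p q) (h2 : pvReach m n picture q r) :
    pvReach m n picture p r := Relation.ReflTransGen.trans h1 h2

/-- every cell reachable from `p` either is `p` or carries `p`'s (nonzero) value and is in bounds. -/
theorem pvReach_val {m n : Int} {picture : List (List Int)} {p q : Int × Int}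
    (h : pvReach m n picture p q) :
    q = p ∨ (pvInB m n q ∧ pvGet picture q.1 q.2 = pvGet picture p.1 p.2 ∧
             pvGet picture p.1 p.2 ≠ 0 ∧ pvInB m n p) := by
  induction h with
  | refl => exact Or.inl rfl
  | tail _ hE ih =>
      rename_i b c _
      obtain ⟨hb, hc, h0, hv, _⟩ := hE
      rcases ih with rfl | ⟨_, hveq, h0', hp⟩
      · exact Or.inr ⟨hc, hv, h0, hb⟩
      · exact Or.inr ⟨hc, by rw [hv, hveq], h0', hp⟩

theorem pvComp_inB {m n : Int} {picture : List (List Int)} {p q : Int × Int}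
    (hp : pvInB m n p) (h : pvReach m n picture p q) : pvInB m n q := by
  rcases pvReach_val h with rfl | ⟨h, _⟩ <;> assumption

theorem pvComp_val {m n : Int} {picture : List (List Int)} {p q : Int × Int}
    (h0 : pvGet picture p.1 p.2 ≠ 0) (h : pvReach m n picture p q) :
    pvGet picture q.1 q.2 = pvGet picture p.1 p.2 := by
  rcases pvReach_val h with rfl | ⟨_, h, _⟩ <;> simp [*]

/-- the grid, as a finset. -/
noncomputable def pvGrid (m n : Int) : Finset (Int × Int) := Finset.Ico 0 m ×ˢ Finset.Ico 0 n

theorem pvMem_grid {m n : Int} {p : Int × Int} : p ∈ pvGrid m n ↔ pvInB m n p := by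
  simp [pvGrid, Finset.mem_product, Finset.mem_Ico, pvInB, and_assoc]

theorem pvGrid_card (m n : Int) : (pvGrid m n).card = m.toNat * n.toNat := by
  simp [pvGrid, Finset.card_product, Int.card_Ico]

theorem pvComp_subset_grid {m n : Int} {picture : List (List Int)} {p : Int × Int}
    (hp : pvInB m n p) : pvComp m n picture p ⊆ ↑(pvGrid m n) := by
  intro q hq
  simpa [pvMem_grid] using pvComp_inB hp hq

theorem pvComp_finite {m n : Int} {picture : List (List Int)} {p : Int × Int}
    (hp : pvInB m n p) : (pvComp m n picture p).Finite :=
  Set.Finite.subset (pvGrid m n).finite_toSet (pvComp_subset_grid hp)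

theorem pvComp_self {m n : Int} {picture : List (List Int)} (p : Int × Int) :
    p ∈ pvComp m n picture p := Relation.ReflTransGen.refl

theorem pvComp_ncard_pos {m n : Int} {picture : List (List Int)} {p : Int × Int}
    (hp : pvInB m n p) : 1 ≤ (pvComp m n picture p).ncard := by
  have := Set.ncard_le_ncard (t := pvComp m n picture p)
    (Set.singleton_subset_iff.mpr (pvComp_self p)) (pvComp_finite hp)
  simpa using this

theorem pvComp_ncard_le {m n : Int} {picture : List (List Int)} {p : Int × Int}
    (hp : pvInB m n p) : (pvComp m n picture p).ncard ≤ m.toNat * n.toNat := by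
  have h := Set.ncard_le_ncard (pvComp_subset_grid (picture := picture) hp)
    (pvGrid m n).finite_toSet
  simpa [Set.ncard_coe_finset, pvGrid_card] using h

/-! ### Scan order -/

def pvScanL (m n : Int) : List (Int × Int) :=
  (PySem.List.pyRange 0 m 1).flatMap (fun i => (PySem.List.pyRange 0 n 1).map (fun j => (i, j)))

def pvLex (q p : Int × Int) : Prop := q.1 < p.1 ∨ (q.1 = p.1 ∧ q.2 < p.2)

theorem pvMem_scan {m n : Int} {p : Int × Int} : p ∈ pvScanL m n ↔ pvInB m n p := by
  simp only [pvScanL, List.mem_flatMap, List.mem_map, PySem.List.mem_pyRange_one]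
  constructor
  · rintro ⟨i, hi, j, hj, rfl⟩; exact ⟨hi.1, hi.2, hj.1, hj.2⟩
  · rintro ⟨h1, h2, h3, h4⟩; exact ⟨p.1, ⟨h1, h2⟩, p.2, ⟨h3, h4⟩, rfl⟩

theorem pvPairwise_flatMap {α β : Type} {l : List α} {f : α → List β} {R : β → β → Prop}
    (h1 : ∀ i ∈ l, (f i).Pairwise R)
    (h2 : l.Pairwise (fun a b => ∀ x ∈ f a, ∀ y ∈ f b, R x y)) :
    (l.flatMap f).Pairwise R := by
  induction l with
  | nil => simp
  | cons a t ih =>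
      rw [List.pairwise_cons] at h2
      simp only [List.flatMap_cons, List.pairwise_append]
      refine ⟨h1 a (by simp), ih (fun i hi => h1 i (by simp [hi])) h2.2, ?_⟩
      intro x hx y hy
      obtain ⟨b, hb, hyb⟩ := List.mem_flatMap.mp hy
      exact h2.1 b hb x hx y hyb

theorem pvScan_sorted (m n : Int) : (pvScanL m n).Pairwise pvLex := by
  apply pvPairwise_flatMap
  · intro i _
    refine List.Pairwise.map _ ?_ (PySem.List.pairwise_lt_pyRange_one 0 n)
    intro a b hab; exact Or.inr ⟨rfl, hab⟩
  · refine List.Pairwise.imp ?_ (PySem.List.pairwise_lt_pyRange_one 0 m)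
    intro a b hab x hx y hy
    simp only [List.mem_map] at hx hy
    obtain ⟨j1, _, rfl⟩ := hx
    obtain ⟨j2, _, rfl⟩ := hy
    exact Or.inl hab

theorem pvScan_split {m n : Int} {P rest : List (Int × Int)} {p : Int × Int}
    (hsplit : pvScanL m n = P ++ p :: rest) :
    ∀ q, q ∈ P ↔ (pvInB m n q ∧ pvLex q p) := by
  have hs := pvScan_sorted m n
  rw [hsplit] at hs
  rw [List.pairwise_append] at hs
  obtain ⟨_, hrest, hcross⟩ := hs
  rw [List.pairwise_cons] at hrest
  intro q
  constructor
  · intro hq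
    refine ⟨pvMem_scan.mp ?_, hcross q hq p (by simp)⟩
    rw [hsplit]; exact List.mem_append_left _ hq
  · rintro ⟨hin, hlex⟩
    have hq : q ∈ P ++ p :: rest := by rw [← hsplit]; exact pvMem_scan.mpr hin
    rcases List.mem_append.mp hq with h | h
    · exact h
    · rcases List.mem_cons.mp h with rfl | h
      · exfalso; rcases hlex with h | ⟨_, h⟩ <;> omega
      · exfalso
        have := hrest.1 q h
        rcases hlex with h1 | ⟨h1, h1'⟩ <;> rcases this with h2 | ⟨h2, h2'⟩ <;> omega

/-! ### The visit matrix -/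

def pvWF (m n : Int) (v : List (List Int)) : Prop :=
  v.length = m.toNat ∧ ∀ row ∈ v, row.length = n.toNat

def pvVisS (m n : Int) (v : List (List Int)) : Set (Int × Int) :=
  {p | pvInB m n p ∧ pvGet v p.1 p.2 ≠ 0}

theorem pvPySetD_eq_set {α : Type} (xs : List α) {i : Int} (v : α)
    (h0 : 0 ≤ i) (h1 : i < (xs.length : Int)) :
    PySem.List.pySetD xs i v = xs.set i.toNat v := by
  have : i = ((i.toNat : Nat) : Int) := by omega
  rw [PySem.List.pySetD, this, PySem.List.pySet?_natCast xs i.toNat v (by omega)]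
  rfl

theorem pvWF_set2 {m n : Int} {v : List (List Int)} (hw : pvWF m n v)
    {i j : Int} (hij : pvInB m n (i, j)) (x : Int) : pvWF m n (pvSet2 v i j x) := by
  obtain ⟨hi1, hi2, hj1, hj2⟩ := hij
  have hlen : i < (v.length : Int) := by have := hw.1; omega
  constructor
  · rw [pvSet2, pvPySetD_eq_set _ _ hi1 hlen, List.length_set, hw.1]
  · intro row hrow
    rw [pvSet2, pvPySetD_eq_set _ _ hi1 hlen] at hrow
    rcases List.mem_or_eq_of_mem_set hrow with h | rfl
    · exact hw.2 _ h
    · have hrlen : (PySem.List.pyGetD v i ([] : List Int)) = v[i.toNat] :=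
        PySem.List.pyGetD_eq_getElem v _ hi1 hlen
      rw [hrlen, pvPySetD_eq_set _ _ hj1 (by rw [hw.2 _ (List.getElem_mem _)]; omega),
        List.length_set]
      exact hw.2 _ (List.getElem_mem _)

theorem pvGet_set2 {m n : Int} {v : List (List Int)} (hw : pvWF m n v)
    {i j a b : Int} (hij : pvInB m n (i, j)) (hab : pvInB m n (a, b)) (x : Int) :
    pvGet (pvSet2 v i j x) a b = if a = i ∧ b = j then x else pvGet v a b := by
  obtain ⟨hi1, hi2, hj1, hj2⟩ := hij
  obtain ⟨ha1, ha2, hb1, hb2⟩ := hab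
  have hvi : i < (v.length : Int) := by have := hw.1; omega
  have hva : a < (v.length : Int) := by have := hw.1; omega
  have hrow : (PySem.List.pyGetD v i ([] : List Int)) = v[i.toNat] :=
    PySem.List.pyGetD_eq_getElem v _ hi1 hvi
  have hrlen : v[i.toNat].length = n.toNat := hw.2 _ (List.getElem_mem _)
  have hrlen' : ∀ k : Nat, (hk : k < v.length) → v[k].length = n.toNat :=
    fun k hk => hw.2 _ (List.getElem_mem _)
  rw [pvSet2, pvGet, pvPySetD_eq_set _ _ hi1 hvi,
    PySem.List.pyGetD_eq_getElem _ ([] : List Int) ha1 (by rw [List.length_set]; exact hva),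
    List.getElem_set]
  by_cases hai : a = i
  · subst hai
    rw [if_pos rfl, hrow, pvPySetD_eq_set _ _ hj1 (by rw [hrlen]; omega),
      PySem.List.pyGetD_eq_getElem _ _ hb1 (by rw [List.length_set, hrlen]; omega),
      List.getElem_set]
    by_cases hbj : b = j
    · rw [if_pos (by omega), if_pos ⟨rfl, hbj⟩]
    · rw [if_neg (by omega), if_neg (fun hc => hbj hc.2), pvGet,
        PySem.List.pyGetD_eq_getElem _ ([] : List Int) ha1 hva,
        PySem.List.pyGetD_eq_getElem _ _ hb1 (by rw [hrlen' a.toNat (by omega)]; omega)]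
  · rw [if_neg (by omega), if_neg (fun hc => hai hc.1), pvGet,
      PySem.List.pyGetD_eq_getElem _ ([] : List Int) ha1 hva]

theorem pvVis_set2 {m n : Int} {v : List (List Int)} (hw : pvWF m n v)
    {i j : Int} (hij : pvInB m n (i, j)) :
    pvVisS m n (pvSet2 v i j 1) = insert (i, j) (pvVisS m n v) := by
  ext ⟨a, b⟩
  simp only [pvVisS, Set.mem_setOf_eq, Set.mem_insert_iff, Prod.mk.injEq]
  constructor
  · rintro ⟨hab, hne⟩
    rw [pvGet_set2 hw hij hab 1] at hne
    split_ifs at hne with h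
    · exact Or.inl ⟨h.1, h.2⟩
    · exact Or.inr ⟨hab, hne⟩
  · rintro (⟨rfl, rfl⟩ | ⟨hab, hne⟩)
    · exact ⟨hij, by rw [pvGet_set2 hw hij hij 1, if_pos ⟨rfl, rfl⟩]; norm_num⟩
    · exact ⟨hab, by rw [pvGet_set2 hw hij hab 1]; split_ifs with h <;> simp_all⟩

theorem pvVisS_subset_grid {m n : Int} {v : List (List Int)} :
    pvVisS m n v ⊆ ↑(pvGrid m n) := fun _ hp => pvMem_grid.mpr hp.1

theorem pvVisS_finite (m n : Int) (v : List (List Int)) : (pvVisS m n v).Finite :=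
  Set.Finite.subset (pvGrid m n).finite_toSet pvVisS_subset_grid

theorem pvGet_init (m n i j : Int) :
    pvGet ((PySem.List.pyRange 0 m 1).map (fun _ => List.replicate n.toNat (0 : Int))) i j
      = 0 := by
  rw [pvGet, PySem.List.pyGetD, PySem.List.pyGetD]
  cases hrow : PySem.List.pyGet? ((PySem.List.pyRange 0 m 1).map
      (fun _ => List.replicate n.toNat (0 : Int))) i with
  | none =>
      simp only [Option.getD_none]
      cases h2 : PySem.List.pyGet? ([] : List Int) j with
      | none => rfl
      | some x => exact absurd (PySem.List.mem_of_pyGet?_eq_some _ h2) (by simp)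
  | some row =>
      simp only [Option.getD_some]
      have := PySem.List.mem_of_pyGet?_eq_some _ hrow
      simp only [List.mem_map] at this
      obtain ⟨_, _, rfl⟩ := this
      cases h2 : PySem.List.pyGet? (List.replicate n.toNat (0 : Int)) j with
      | none => rfl
      | some x =>
          have := PySem.List.mem_of_pyGet?_eq_some _ h2
          simp only [List.eq_of_mem_replicate this, Option.getD_some]

theorem pvWF_init (m n : Int) :
    pvWF m n ((PySem.List.pyRange 0 m 1).map (fun _ => List.replicate n.toNat (0 : Int))) := by
  constructor
  · rw [List.length_map, PySem.List.length_pyRange_one]; omega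
  · intro row hrow
    obtain ⟨_, _, rfl⟩ := List.mem_map.mp hrow
    exact List.length_replicate

theorem pvVis_init (m n : Int) :
    pvVisS m n ((PySem.List.pyRange 0 m 1).map (fun _ => List.replicate n.toNat (0 : Int)))
      = ∅ := by
  ext p
  constructor
  · rintro ⟨_, hne⟩; exact hne (pvGet_init m n p.1 p.2)
  · intro h; exact absurd h (Set.notMem_empty p)

/-! ### BFS correctness -/

/-- the body of A's direction loop, as a named function (definitionally the
    lambda inside `pvBFS`). -/
def pvDirF (picture : List (List Int)) (m n target x y : Int)
    (st : List (List Int) × Int × List (Int × Int)) (d : Int × Int) :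
    List (List Int) × Int × List (Int × Int) :=
  let di := x + d.1
  let dj := y + d.2
  if 0 ≤ di ∧ di < m ∧ 0 ≤ dj ∧ dj < n ∧ pvGet st.1 di dj = 0 ∧
      pvGet picture di dj = target then
    (pvSet2 st.1 di dj 1, st.2.1 + 1, st.2.2 ++ [(di, dj)])
  else st

theorem pvBFS_cons (picture : List (List Int)) (m n target : Int) (fuel : Nat)
    (x y : Int) (q : List (Int × Int)) (visit : List (List Int)) (cnt : Int) :
    pvBFS picture m n target (fuel + 1) ((x, y) :: q) visit cnt =
      pvBFS picture m n target fuel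
        (pvDR.foldl (pvDirF picture m n target x y) (visit, cnt, q)).2.2
        (pvDR.foldl (pvDirF picture m n target x y) (visit, cnt, q)).1
        (pvDR.foldl (pvDirF picture m n target x y) (visit, cnt, q)).2.1 := rfl

structure PvCtx (m n : Int) (picture : List (List Int)) (V : Set (Int × Int))
    (s : Int × Int) : Prop where
  hin : pvInB m n s
  h0 : pvGet picture s.1 s.2 ≠ 0
  hsV : s ∉ V
  hcl : ∀ x ∈ V, ∀ y, pvE m n picture x y → y ∈ V

theorem pvV_closed_reach {m n : Int} {picture : List (List Int)} {V : Set (Int × Int)}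
    {s : Int × Int} (ctx : PvCtx m n picture V s) {x y : Int × Int}
    (hx : x ∈ V) (h : pvReach m n picture x y) : y ∈ V := by
  induction h with
  | refl => exact hx
  | tail _ hE ih => exact ctx.hcl _ ih _ hE

theorem pvCtx_disj {m n : Int} {picture : List (List Int)} {V : Set (Int × Int)}
    {s : Int × Int} (ctx : PvCtx m n picture V s) :
    ∀ x ∈ pvComp m n picture s, x ∉ V :=
  fun _ hx hxV => ctx.hsV (pvV_closed_reach ctx hxV (pvReach_symm hx))

structure PvInv (m n : Int) (picture : List (List Int)) (V : Set (Int × Int))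
    (s : Int × Int) (X : Set (Int × Int))
    (st : List (List Int) × Int × List (Int × Int)) : Prop where
  wf : pvWF m n st.1
  sub : V ⊆ pvVisS m n st.1
  cap : pvVisS m n st.1 ⊆ V ∪ pvComp m n picture s
  smem : s ∈ pvVisS m n st.1
  qmem : ∀ x ∈ st.2.2, x ∈ pvVisS m n st.1 ∧ x ∉ V
  cnt : st.2.1 = (((pvVisS m n st.1 \ V).ncard : Nat) : Int)
  proc : ∀ z, z ∈ pvVisS m n st.1 → z ∉ V → z ∉ st.2.2 → z ∉ X →
      ∀ y, pvE m n picture z y → y ∈ pvVisS m n st.1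

noncomputable def pvMu (m n : Int) (picture : List (List Int)) (s : Int × Int)
    (st : List (List Int) × Int × List (Int × Int)) : Nat :=
  st.2.2.length + (pvComp m n picture s \ pvVisS m n st.1).ncard

theorem pvVid_comp {m n : Int} {picture : List (List Int)} {V : Set (Int × Int)}
    {s : Int × Int} {X st} (inv : PvInv m n picture V s X st) {x : Int × Int}
    (hx : x ∈ pvVisS m n st.1) (hxV : x ∉ V) : x ∈ pvComp m n picture s := by
  rcases inv.cap hx with h | h
  · exact absurd h hxV
  · exact h

theorem pvDirStep {m n target : Int} {picture : List (List Int)} {V : Set (Int × Int)}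
    {s : Int × Int} (ctx : PvCtx m n picture V s)
    (htgt : target = pvGet picture s.1 s.2) {x₀ : Int × Int}
    {st : List (List Int) × Int × List (Int × Int)}
    (hx₀ : x₀ ∈ pvVisS m n st.1 ∧ x₀ ∉ V)
    (inv : PvInv m n picture V s {x₀} st) {d : Int × Int} (hd : d ∈ pvDR) :
    PvInv m n picture V s {x₀} (pvDirF picture m n target x₀.1 x₀.2 st d) ∧
    pvMu m n picture s (pvDirF picture m n target x₀.1 x₀.2 st d) = pvMu m n picture s st ∧
    pvVisS m n st.1 ⊆ pvVisS m n (pvDirF picture m n target x₀.1 x₀.2 st d).1 ∧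
    (∀ y, pvE m n picture x₀ y → y.1 = x₀.1 + d.1 → y.2 = x₀.2 + d.2 →
      y ∈ pvVisS m n (pvDirF picture m n target x₀.1 x₀.2 st d).1) := by
  have hx₀c : x₀ ∈ pvComp m n picture s := pvVid_comp inv hx₀.1 hx₀.2
  have hx₀val : pvGet picture x₀.1 x₀.2 = pvGet picture s.1 s.2 := pvComp_val ctx.h0 hx₀c
  rw [pvDirF]
  set di := x₀.1 + d.1 with hdi
  set dj := x₀.2 + d.2 with hdj
  by_cases hc : 0 ≤ di ∧ di < m ∧ 0 ≤ dj ∧ dj < n ∧ pvGet st.1 di dj = 0 ∧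
      pvGet picture di dj = target
  · rw [if_pos hc]
    obtain ⟨h1, h2, h3, h4, h5, h6⟩ := hc
    have hyb : pvInB m n (di, dj) := ⟨h1, h2, h3, h4⟩
    have hynv : (di, dj) ∉ pvVisS m n st.1 := fun hy => hy.2 h5
    have hE : pvE m n picture x₀ (di, dj) := by
      refine ⟨hx₀.1.1, hyb, by rw [hx₀val]; exact ctx.h0, by rw [h6, htgt, hx₀val], ?_⟩
      simp only [pvDR, List.mem_cons, List.not_mem_nil, or_false] at hd
      rcases hd with rfl | rfl | rfl | rfl
      · exact Or.inl ⟨by omega, by omega⟩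
      · exact Or.inr (Or.inl ⟨by omega, by omega⟩)
      · exact Or.inr (Or.inr (Or.inl ⟨by omega, by omega⟩))
      · exact Or.inr (Or.inr (Or.inr ⟨by omega, by omega⟩))
    have hyc : (di, dj) ∈ pvComp m n picture s := Relation.ReflTransGen.tail hx₀c hE
    have hynV : (di, dj) ∉ V := pvCtx_disj ctx _ hyc
    have hvis' : pvVisS m n (pvSet2 st.1 di dj 1) = insert (di, dj) (pvVisS m n st.1) :=
      pvVis_set2 inv.wf hyb
    have hfinv : (pvVisS m n st.1).Finite := pvVisS_finite m n st.1
    refine ⟨⟨pvWF_set2 inv.wf hyb 1, ?_, ?_, ?_, ?_, ?_, ?_⟩, ?_, ?_, ?_⟩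
    · exact fun z hz => by rw [hvis']; exact Set.mem_insert_of_mem _ (inv.sub hz)
    · rw [hvis']
      rintro z (rfl | hz)
      · exact Or.inr hyc
      · exact inv.cap hz
    · rw [hvis']; exact Set.mem_insert_of_mem _ inv.smem
    · intro z hz
      simp only [List.mem_append, List.mem_singleton] at hz
      rcases hz with hz | rfl
      · have := inv.qmem z hz
        exact ⟨by rw [hvis']; exact Set.mem_insert_of_mem _ this.1, this.2⟩
      · exact ⟨by rw [hvis']; exact Set.mem_insert _ _, hynV⟩
    · show st.2.1 + 1 = _
      rw [inv.cnt, hvis']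
      have : insert (di, dj) (pvVisS m n st.1) \ V = insert (di, dj) (pvVisS m n st.1 \ V) := by
        ext z
        simp only [Set.mem_diff, Set.mem_insert_iff]
        constructor
        · rintro ⟨rfl | hz, hzV⟩
          · exact Or.inl rfl
          · exact Or.inr ⟨hz, hzV⟩
        · rintro (rfl | ⟨hz, hzV⟩)
          · exact ⟨Or.inl rfl, hynV⟩
          · exact ⟨Or.inr hz, hzV⟩
      rw [this, Set.ncard_insert_of_notMem (fun hy => hynv hy.1) hfinv.diff]
      push_cast
      ring
    · intro z hz hzV hzq hzX y hEzy
      rw [hvis'] at hz ⊢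
      rcases hz with rfl | hz
      · exact absurd (List.mem_append_right _ (by simp) : (di, dj) ∈ st.2.2 ++ [(di, dj)]) hzq
      · have hzq' : z ∉ st.2.2 := fun h => hzq (by simp [h])
        exact Set.mem_insert_of_mem _ (inv.proc z hz hzV hzq' hzX y hEzy)
    · show pvMu m n picture s (pvSet2 st.1 di dj 1, st.2.1 + 1, st.2.2 ++ [(di, dj)]) = _
      rw [pvMu, pvMu]
      simp only [List.length_append, List.length_singleton, hvis']
      have hsetd : pvComp m n picture s \ insert (di, dj) (pvVisS m n st.1)
          = (pvComp m n picture s \ pvVisS m n st.1) \ {(di, dj)} := by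
        ext z
        simp only [Set.mem_diff, Set.mem_insert_iff, Set.mem_singleton_iff]
        tauto
      have hmem : (di, dj) ∈ pvComp m n picture s \ pvVisS m n st.1 := ⟨hyc, hynv⟩
      have hfinc : (pvComp m n picture s).Finite := pvComp_finite ctx.hin
      have hpos : 1 ≤ (pvComp m n picture s \ pvVisS m n st.1).ncard :=
        (Set.ncard_pos hfinc.diff).mpr ⟨_, hmem⟩
      rw [hsetd, Set.ncard_diff_singleton_of_mem hmem]
      omega
    · intro z hz; rw [hvis']; exact Set.mem_insert_of_mem _ hz
    · intro y _ hy1 hy2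
      rw [hvis']
      have : y = (di, dj) := Prod.ext (by omega) (by omega)
      rw [this]; exact Set.mem_insert _ _
  · rw [if_neg hc]
    refine ⟨inv, rfl, fun _ h => h, ?_⟩
    intro y hEy hy1 hy2
    have hyeq : y = (di, dj) := Prod.ext (by omega) (by omega)
    subst hyeq
    obtain ⟨_, hyb, _, hval, _⟩ := hEy
    by_contra hnot
    have hget0 : pvGet st.1 di dj = 0 := by
      by_contra hne
      exact hnot ⟨hyb, hne⟩
    exact hc ⟨hyb.1, hyb.2.1, hyb.2.2.1, hyb.2.2.2, hget0,
      by rw [hval, hx₀val, htgt]⟩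

set_option maxHeartbeats 1000000 in
theorem pvCellStep {m n target : Int} {picture : List (List Int)} {V : Set (Int × Int)}
    {s : Int × Int} (ctx : PvCtx m n picture V s)
    (htgt : target = pvGet picture s.1 s.2) {x₀ : Int × Int}
    {visit : List (List Int)} {cnt : Int} {q' : List (Int × Int)}
    (inv : PvInv m n picture V s ∅ (visit, cnt, x₀ :: q')) :
    PvInv m n picture V s ∅ (pvDR.foldl (pvDirF picture m n target x₀.1 x₀.2) (visit, cnt, q')) ∧
    pvMu m n picture s (pvDR.foldl (pvDirF picture m n target x₀.1 x₀.2) (visit, cnt, q')) + 1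
      = pvMu m n picture s (visit, cnt, x₀ :: q') := by
  have hx₀ : x₀ ∈ pvVisS m n visit ∧ x₀ ∉ V := inv.qmem x₀ (by simp)
  -- the invariant with x₀ popped but still pending
  have inv₁ : PvInv m n picture V s {x₀} (visit, cnt, q') := by
    refine ⟨inv.wf, inv.sub, inv.cap, inv.smem, ?_, inv.cnt, ?_⟩
    · exact fun x hx => inv.qmem x (by simp [hx])
    · intro z hz hzV hzq hzX y hE
      refine inv.proc z hz hzV ?_ (by simp) y hE
      intro hmem
      rcases List.mem_cons.mp hmem with rfl | hmem
      · exact hzX rfl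
      · exact hzq hmem
  have hd1 : ((1 : Int), (0 : Int)) ∈ pvDR := by simp [pvDR]
  have hd2 : ((0 : Int), (1 : Int)) ∈ pvDR := by simp [pvDR]
  have hd3 : ((-1 : Int), (0 : Int)) ∈ pvDR := by simp [pvDR]
  have hd4 : ((0 : Int), (-1 : Int)) ∈ pvDR := by simp [pvDR]
  obtain ⟨i1, e1, m1, c1⟩ := @pvDirStep m n target picture V s ctx htgt x₀
    (visit, cnt, q') hx₀ inv₁ (1, 0) hd1
  set st1 := pvDirF picture m n target x₀.1 x₀.2 (visit, cnt, q') (1, 0) with hst1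
  have hx₁ : x₀ ∈ pvVisS m n st1.1 ∧ x₀ ∉ V := ⟨m1 hx₀.1, hx₀.2⟩
  obtain ⟨i2, e2, m2, c2⟩ := @pvDirStep m n target picture V s ctx htgt x₀
    st1 hx₁ i1 (0, 1) hd2
  set st2 := pvDirF picture m n target x₀.1 x₀.2 st1 (0, 1) with hst2
  have hx₂ : x₀ ∈ pvVisS m n st2.1 ∧ x₀ ∉ V := ⟨m2 hx₁.1, hx₀.2⟩
  obtain ⟨i3, e3, m3, c3⟩ := @pvDirStep m n target picture V s ctx htgt x₀
    st2 hx₂ i2 (-1, 0) hd3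
  set st3 := pvDirF picture m n target x₀.1 x₀.2 st2 (-1, 0) with hst3
  have hx₃ : x₀ ∈ pvVisS m n st3.1 ∧ x₀ ∉ V := ⟨m3 hx₂.1, hx₀.2⟩
  obtain ⟨i4, e4, m4, c4⟩ := @pvDirStep m n target picture V s ctx htgt x₀
    st3 hx₃ i3 (0, -1) hd4
  set st4 := pvDirF picture m n target x₀.1 x₀.2 st3 (0, -1) with hst4
  have hfold : pvDR.foldl (pvDirF picture m n target x₀.1 x₀.2) (visit, cnt, q') = st4 := by
    simp only [pvDR, List.foldl_cons, List.foldl_nil, hst1, hst2, hst3, hst4]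
  rw [hfold]
  -- x₀'s whole neighbourhood is visited after the four directions
  have hcov : ∀ y, pvE m n picture x₀ y → y ∈ pvVisS m n st4.1 := by
    intro y hE
    rcases hE.2.2.2.2 with ⟨ha, hb⟩ | ⟨ha, hb⟩ | ⟨ha, hb⟩ | ⟨ha, hb⟩
    · exact m4 (m3 (m2 (c1 y hE (by omega) (by omega))))
    · exact m4 (m3 (c2 y hE (by omega) (by omega)))
    · exact m4 (c3 y hE (by omega) (by omega))
    · exact c4 y hE (by omega) (by omega)
  constructor
  · refine ⟨i4.wf, i4.sub, i4.cap, i4.smem, i4.qmem, i4.cnt, ?_⟩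
    intro z hz hzV hzq _ y hE
    by_cases hzx : z = x₀
    · subst hzx; exact hcov y hE
    · exact i4.proc z hz hzV hzq (by simpa using hzx) y hE
  · rw [e4, e3, e2, e1]
    simp only [pvMu, List.length_cons]
    omega

theorem pvBFSRun {m n : Int} {picture : List (List Int)} {V : Set (Int × Int)}
    {s : Int × Int} (ctx : PvCtx m n picture V s) :
    ∀ (fuel : Nat) (st : List (List Int) × Int × List (Int × Int)),
      PvInv m n picture V s ∅ st → pvMu m n picture s st < fuel →
      pvWF m n (pvBFS picture m n (pvGet picture s.1 s.2) fuel st.2.2 st.1 st.2.1).1 ∧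
      pvVisS m n (pvBFS picture m n (pvGet picture s.1 s.2) fuel st.2.2 st.1 st.2.1).1
        = V ∪ pvComp m n picture s ∧
      (pvBFS picture m n (pvGet picture s.1 s.2) fuel st.2.2 st.1 st.2.1).2
        = (((pvComp m n picture s).ncard : Nat) : Int) := by
  intro fuel
  induction fuel with
  | zero => intro st _ hmu; omega
  | succ fuel ih =>
      rintro ⟨visit, cnt, q⟩ inv hmu
      cases q with
      | nil =>
          -- loop ends; the visited set is exactly V ∪ comp s
          have hcompsub : pvComp m n picture s ⊆ pvVisS m n visit := by
            intro x hx
            induction hx with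
            | refl => exact inv.smem
            | tail hr hE ihx =>
                rename_i b c
                by_cases hbV : b ∈ V
                · exact inv.sub (ctx.hcl b hbV c hE)
                · exact inv.proc b ihx hbV (by simp) (by simp) c hE
          have hvis : pvVisS m n visit = V ∪ pvComp m n picture s := by
            apply Set.eq_of_subset_of_subset inv.cap
            rintro x (hx | hx)
            · exact inv.sub hx
            · exact hcompsub hx
          have hdiff : pvVisS m n visit \ V = pvComp m n picture s := by
            rw [hvis]
            ext x
            simp only [Set.mem_diff, Set.mem_union]
            constructor
            · rintro ⟨hx | hx, hxV⟩
              · exact absurd hx hxV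
              · exact hx
            · intro hx
              exact ⟨Or.inr hx, pvCtx_disj ctx x hx⟩
          refine ⟨inv.wf, hvis, ?_⟩
          have := inv.cnt
          simp only at this ⊢
          rw [show pvBFS picture m n (pvGet picture s.1 s.2) (fuel + 1) [] visit cnt
            = (visit, cnt) from rfl]
          rw [this, hdiff]
      | cons x₀ q' =>
          obtain ⟨x, y⟩ := x₀
          rw [pvBFS_cons]
          obtain ⟨inv', hmu'⟩ := @pvCellStep m n (pvGet picture s.1 s.2) picture V s ctx rfl
            (x, y) visit cnt q' inv
          have inv'' : PvInv m n picture V s ∅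
              (pvDR.foldl (pvDirF picture m n (pvGet picture s.1 s.2) x y) (visit, cnt, q')) := inv'
          have hmu'' : pvMu m n picture s
              (pvDR.foldl (pvDirF picture m n (pvGet picture s.1 s.2) x y) (visit, cnt, q')) + 1
              = pvMu m n picture s (visit, cnt, (x, y) :: q') := hmu'
          exact ih (pvDR.foldl (pvDirF picture m n (pvGet picture s.1 s.2) x y) (visit, cnt, q'))
            inv'' (by omega)

/-! ### A's outer scan -/

def pvU (m n : Int) (picture : List (List Int)) (P : List (Int × Int)) : Set (Int × Int) :=
  {x | ∃ q ∈ P, pvGet picture q.1 q.2 ≠ 0 ∧ pvReach m n picture q x}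

/-- `p` is the first cell of its nonzero component in scan order. -/
def pvFirst (m n : Int) (picture : List (List Int)) (p : Int × Int) : Prop :=
  pvGet picture p.1 p.2 ≠ 0 ∧
  ∀ q, pvInB m n q → pvLex q p → ¬ pvReach m n picture p q

noncomputable def pvFirstsIn (m n : Int) (picture : List (List Int))
    (P : List (Int × Int)) : List (Int × Int) :=
  P.filter (fun p => @decide (pvFirst m n picture p) (Classical.propDecidable _))

noncomputable def pvSizeI (m n : Int) (picture : List (List Int)) (p : Int × Int) : Int :=
  (((pvComp m n picture p).ncard : Nat) : Int)

def pvAInv (m n : Int) (picture : List (List Int)) (P : List (Int × Int))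
    (st : List (List Int) × Int × Int) : Prop :=
  pvWF m n st.1 ∧ pvVisS m n st.1 = pvU m n picture P ∧
  st.2.1 = (((pvFirstsIn m n picture P).length : Nat) : Int) ∧
  st.2.2 = ((pvFirstsIn m n picture P).map (pvSizeI m n picture)).foldl max 0

theorem pvU_closed {m n : Int} {picture : List (List Int)} {P : List (Int × Int)} :
    ∀ x ∈ pvU m n picture P, ∀ y, pvE m n picture x y → y ∈ pvU m n picture P := by
  rintro x ⟨q, hq, hq0, hr⟩ y hE
  exact ⟨q, hq, hq0, Relation.ReflTransGen.tail hr hE⟩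

theorem pvU_append_zero {m n : Int} {picture : List (List Int)} {P : List (Int × Int)}
    {p : Int × Int} (hp0 : pvGet picture p.1 p.2 = 0) :
    pvU m n picture (P ++ [p]) = pvU m n picture P := by
  ext x
  constructor
  · rintro ⟨q, hq, hq0, hr⟩
    rcases List.mem_append.mp hq with hq | hq
    · exact ⟨q, hq, hq0, hr⟩
    · rcases List.mem_singleton.mp hq with rfl
      exact absurd hp0 hq0
  · rintro ⟨q, hq, hq0, hr⟩
    exact ⟨q, List.mem_append_left _ hq, hq0, hr⟩

theorem pvU_append_nonzero {m n : Int} {picture : List (List Int)} {P : List (Int × Int)}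
    {p : Int × Int} (hp0 : pvGet picture p.1 p.2 ≠ 0) :
    pvU m n picture (P ++ [p]) = pvU m n picture P ∪ pvComp m n picture p := by
  ext x
  constructor
  · rintro ⟨q, hq, hq0, hr⟩
    rcases List.mem_append.mp hq with hq | hq
    · exact Or.inl ⟨q, hq, hq0, hr⟩
    · rcases List.mem_singleton.mp hq with rfl
      exact Or.inr hr
  · rintro (⟨q, hq, hq0, hr⟩ | hr)
    · exact ⟨q, List.mem_append_left _ hq, hq0, hr⟩
    · exact ⟨p, List.mem_append_right _ (by simp), hp0, hr⟩

theorem pvFirstsIn_append {m n : Int} {picture : List (List Int)} {P : List (Int × Int)}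
    {p : Int × Int} :
    pvFirstsIn m n picture (P ++ [p]) =
      pvFirstsIn m n picture P ++
        (@ite _ (pvFirst m n picture p) (Classical.propDecidable _) [p] []) := by
  rw [pvFirstsIn, List.filter_append, pvFirstsIn]
  congr 1
  by_cases h : pvFirst m n picture p
  · rw [if_pos h, List.filter_singleton]
    have hd : @decide (pvFirst m n picture p) (Classical.propDecidable _) = true :=
      @decide_eq_true _ (Classical.propDecidable _) h
    rw [hd, Bool.cond_eq_ite, if_pos rfl]
  · rw [if_neg h, List.filter_singleton]
    have hd : @decide (pvFirst m n picture p) (Classical.propDecidable _) = false :=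
      @decide_eq_false _ (Classical.propDecidable _) h
    rw [hd, Bool.cond_eq_ite, if_neg (by simp)]

set_option maxHeartbeats 1000000 in
theorem pvAStep {m n : Int} {picture : List (List Int)} {P : List (Int × Int)}
    {p : Int × Int} (hP : ∀ q, q ∈ P ↔ pvInB m n q ∧ pvLex q p) (hp : pvInB m n p)
    {st : List (List Int) × Int × Int} (h : pvAInv m n picture P st) :
    pvAInv m n picture (P ++ [p]) (pvScanStep picture m n st p.1 p.2) := by
  obtain ⟨pi, pj⟩ := p
  obtain ⟨hwf, hvis, hcnt, hmax⟩ := h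
  by_cases hp0 : pvGet picture pi pj = 0
  · -- zero cell: nothing happens
    rw [pvScanStep, if_neg (fun hc => hc.1 hp0)]
    have hnf : ¬ pvFirst m n picture (pi, pj) := fun hf => hf.1 hp0
    refine ⟨hwf, ?_, ?_, ?_⟩
    · rw [hvis, pvU_append_zero hp0]
    · rw [hcnt, pvFirstsIn_append, if_neg hnf, List.append_nil]
    · rw [hmax, pvFirstsIn_append, if_neg hnf, List.append_nil]
  · by_cases hpv : (pi, pj) ∈ pvVisS m n st.1
    · -- already visited: component counted earlier
      have hget : pvGet st.1 pi pj ≠ 0 := hpv.2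
      rw [pvScanStep, if_neg (fun hc => hget hc.2)]
      obtain ⟨q, hqP, hq0, hqr⟩ : (pi, pj) ∈ pvU m n picture P := hvis ▸ hpv
      have hnf : ¬ pvFirst m n picture (pi, pj) := by
        rintro ⟨_, hall⟩
        have hq' := (hP q).mp hqP
        exact hall q hq'.1 hq'.2 (pvReach_symm hqr)
      refine ⟨hwf, ?_, ?_, ?_⟩
      · rw [hvis, pvU_append_nonzero hp0]
        refine (Set.union_eq_self_of_subset_right ?_).symm
        intro x hx
        exact ⟨q, hqP, hq0, pvReach_trans hqr hx⟩
      · rw [hcnt, pvFirstsIn_append, if_neg hnf, List.append_nil]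
      · rw [hmax, pvFirstsIn_append, if_neg hnf, List.append_nil]
    · -- a fresh component: run the BFS
      have hget : pvGet st.1 pi pj = 0 := by
        by_contra hne
        exact hpv ⟨hp, hne⟩
      have hfirst : pvFirst m n picture (pi, pj) := by
        refine ⟨hp0, ?_⟩
        intro q hqin hqlex hreach
        have hq0 : pvGet picture q.1 q.2 ≠ 0 := by
          rcases pvReach_val hreach with rfl | ⟨_, hv, h0, _⟩
          · rcases hqlex with h | ⟨_, h⟩ <;> omega
          · rw [hv]; exact h0
        have hqP : q ∈ P := (hP q).mpr ⟨hqin, hqlex⟩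
        exact hpv (hvis ▸ ⟨q, hqP, hq0, pvReach_symm hreach⟩)
      have ctx : PvCtx m n picture (pvVisS m n st.1) (pi, pj) :=
        ⟨hp, hp0, hpv, by rw [hvis]; exact pvU_closed⟩
      have hvis1 : pvVisS m n (pvSet2 st.1 pi pj 1) = insert (pi, pj) (pvVisS m n st.1) :=
        pvVis_set2 hwf hp
      have hfinc : (pvComp m n picture (pi, pj)).Finite := pvComp_finite hp
      have hdins : insert (pi, pj) (pvVisS m n st.1) \ pvVisS m n st.1 = {(pi, pj)} := by
        ext z
        simp only [Set.mem_diff, Set.mem_insert_iff, Set.mem_singleton_iff]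
        constructor
        · rintro ⟨rfl | hz, hznv⟩
          · rfl
          · exact absurd hz hznv
        · rintro rfl; exact ⟨Or.inl rfl, hpv⟩
      have inv0 : PvInv m n picture (pvVisS m n st.1) (pi, pj) ∅
          (pvSet2 st.1 pi pj 1, 1, [(pi, pj)]) := by
        refine ⟨pvWF_set2 hwf hp 1, ?_, ?_, ?_, ?_, ?_, ?_⟩
        · show pvVisS m n st.1 ⊆ _
          rw [hvis1]; exact fun z hz => Set.mem_insert_of_mem _ hz
        · show pvVisS m n (pvSet2 st.1 pi pj 1) ⊆ _
          rw [hvis1]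
          rintro z (rfl | hz)
          · exact Or.inr (pvComp_self _)
          · exact Or.inl hz
        · show (pi, pj) ∈ pvVisS m n (pvSet2 st.1 pi pj 1)
          rw [hvis1]; exact Set.mem_insert _ _
        · intro x hx
          rcases List.mem_singleton.mp hx with rfl
          exact ⟨by rw [hvis1]; exact Set.mem_insert _ _, hpv⟩
        · show (1 : Int) = _
          rw [hvis1, hdins, Set.ncard_singleton]
          norm_num
        · intro z hz hzV hzq _ y hE
          exfalso
          have : z = (pi, pj) := by
            have := (hvis1 ▸ hz)
            rcases this with rfl | hz'
            · rfl
            · exact absurd hz' hzV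
          exact hzq (by simp [this])
      have hmu0 : pvMu m n picture (pi, pj) (pvSet2 st.1 pi pj 1, 1, [(pi, pj)])
          < m.toNat * n.toNat + 1 := by
        rw [pvMu]
        simp only [List.length_singleton, hvis1]
        have hsub : pvComp m n picture (pi, pj) \ insert (pi, pj) (pvVisS m n st.1)
            ⊆ pvComp m n picture (pi, pj) \ {(pi, pj)} := by
          intro z hz
          exact ⟨hz.1, fun hz' => hz.2 (by rw [hz']; exact Set.mem_insert _ _)⟩
        have h1 := Set.ncard_le_ncard hsub (hfinc.diff)
        rw [Set.ncard_diff_singleton_of_mem (pvComp_self _)] at h1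
        have h2 := pvComp_ncard_le (picture := picture) hp
        have h3 := pvComp_ncard_pos (picture := picture) hp
        omega
      obtain ⟨hwf', hvis', hcnt'⟩ := pvBFSRun ctx (m.toNat * n.toNat + 1)
        (pvSet2 st.1 pi pj 1, 1, [(pi, pj)]) inv0 hmu0
      rw [pvScanStep, if_pos ⟨hp0, hget⟩]
      refine ⟨hwf', ?_, ?_, ?_⟩
      · show pvVisS m n (pvBFS picture m n (pvGet picture pi pj) (m.toNat * n.toNat + 1)
          [(pi, pj)] (pvSet2 st.1 pi pj 1) 1).1 = _
        rw [show (pvGet picture pi pj) = pvGet picture (pi, pj).1 (pi, pj).2 from rfl]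
        rw [hvis', hvis, pvU_append_nonzero hp0]
      · show st.2.1 + 1 = _
        rw [hcnt, pvFirstsIn_append, if_pos hfirst, List.length_append]
        push_cast
        simp
      · show max st.2.2 (pvBFS picture m n (pvGet picture pi pj) (m.toNat * n.toNat + 1)
            [(pi, pj)] (pvSet2 st.1 pi pj 1) 1).2 = _
        rw [show (pvGet picture pi pj) = pvGet picture (pi, pj).1 (pi, pj).2 from rfl]
        rw [hcnt', hmax, pvFirstsIn_append, if_pos hfirst, List.map_append,
          List.foldl_append]
        simp [pvSizeI]

def pvAStepF (picture : List (List Int)) (m n : Int)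
    (st : List (List Int) × Int × Int) (p : Int × Int) : List (List Int) × Int × Int :=
  pvScanStep picture m n st p.1 p.2

theorem pvAFold (m n : Int) (picture : List (List Int)) :
    ∀ (rest P : List (Int × Int)) (st : List (List Int) × Int × Int),
      pvScanL m n = P ++ rest → pvAInv m n picture P st →
      pvAInv m n picture (P ++ rest) (rest.foldl (pvAStepF picture m n) st) := by
  intro rest
  induction rest with
  | nil => intro P st _ h; simpa using h
  | cons p rest' ih =>
      intro P st hsplit h
      have hP := pvScan_split hsplit
      have hp : pvInB m n p := pvMem_scan.mp (by rw [hsplit]; simp)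
      have hstep := pvAStep hP hp h
      have hsplit' : pvScanL m n = (P ++ [p]) ++ rest' := by
        rw [hsplit, List.append_assoc, List.singleton_append]
      have := ih (P ++ [p]) (pvAStepF picture m n st p) hsplit' hstep
      rw [List.append_assoc, List.singleton_append] at this
      simpa using this

theorem pvA_final (m n : Int) (picture : List (List Int)) :
    Solution m n picture =
      [(((pvFirstsIn m n picture (pvScanL m n)).length : Nat) : Int),
       ((pvFirstsIn m n picture (pvScanL m n)).map (pvSizeI m n picture)).foldl max 0] := by
  have hinit : pvAInv m n picture []
      ((PySem.List.pyRange 0 m 1).map (fun _ => List.replicate n.toNat 0), 0, 0) := by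
    refine ⟨pvWF_init m n, ?_, by simp [pvFirstsIn], by simp [pvFirstsIn]⟩
    rw [pvVis_init]
    ext x
    simp [pvU]
  have hmain := pvAFold m n picture (pvScanL m n) [] _ rfl hinit
  rw [List.nil_append] at hmain
  obtain ⟨_, _, h1, h2⟩ := hmain
  have hform : Solution m n picture =
      [((pvScanL m n).foldl (pvAStepF picture m n)
          ((PySem.List.pyRange 0 m 1).map (fun _ => List.replicate n.toNat 0), 0, 0)).2.1,
       ((pvScanL m n).foldl (pvAStepF picture m n)
          ((PySem.List.pyRange 0 m 1).map (fun _ => List.replicate n.toNat 0), 0, 0)).2.2] := by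
    simp only [Solution, pvScanL, List.foldl_flatMap, List.foldl_map, pvAStepF]
  rw [hform, h1, h2]

/-! ### Union-find -/

def pvIter (parent : List Int) (d : Nat) (x : Int) : Int := (fun y => pvIGet parent y)^[d] x

def pvIsRoot (parent : List Int) (x : Int) : Prop := pvIGet parent x = x

def pvRootRel (parent : List Int) (x r : Int) : Prop :=
  ∃ d, pvIter parent d x = r ∧ pvIsRoot parent r

noncomputable def pvNR (total : Int) (parent : List Int) : Nat :=
  ((Finset.Ico (0 : Int) total).filter (fun x => pvIGet parent x ≠ x)).card

structure PvUF (total : Int) (parent : List Int) : Prop where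
  len : parent.length = total.toNat
  rng : ∀ x, 0 ≤ x → x < total → 0 ≤ pvIGet parent x ∧ pvIGet parent x < total
  term : ∀ x, 0 ≤ x → x < total →
      ∃ d, d ≤ pvNR total parent ∧ pvIsRoot parent (pvIter parent d x)

def pvRootD (total : Int) (parent : List Int) (x : Int) : Int :=
  pvFind parent (total.toNat + 1) x

theorem pvNR_le (total : Int) (parent : List Int) : pvNR total parent ≤ total.toNat := by
  have := Finset.card_filter_le (Finset.Ico (0 : Int) total)
    (fun x => pvIGet parent x ≠ x)
  rw [Int.card_Ico] at this
  rw [pvNR]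
  omega

theorem pvIter_zero (parent : List Int) (x : Int) : pvIter parent 0 x = x := rfl

theorem pvIter_succ (parent : List Int) (d : Nat) (x : Int) :
    pvIter parent (d + 1) x = pvIter parent d (pvIGet parent x) :=
  Function.iterate_succ_apply _ d x

theorem pvIter_absorb {parent : List Int} {r : Int} (h : pvIsRoot parent r) :
    ∀ e, pvIter parent e r = r := by
  intro e
  induction e with
  | zero => rfl
  | succ e ih => rw [pvIter_succ, h]; exact ih

theorem pvRootRel_unique {parent : List Int} {x r r' : Int}
    (h1 : pvRootRel parent x r) (h2 : pvRootRel parent x r') : r = r' := by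
  obtain ⟨d1, hi1, hr1⟩ := h1
  obtain ⟨d2, hi2, hr2⟩ := h2
  rcases Nat.le_total d1 d2 with hle | hle
  · have : pvIter parent d2 x = pvIter parent (d2 - d1) (pvIter parent d1 x) := by
      rw [pvIter, pvIter, pvIter, ← Function.iterate_add_apply]
      congr 1
      omega
    rw [hi1, pvIter_absorb hr1] at this
    rw [← hi2, this]
  · have : pvIter parent d1 x = pvIter parent (d1 - d2) (pvIter parent d2 x) := by
      rw [pvIter, pvIter, pvIter, ← Function.iterate_add_apply]
      congr 1
      omega
    rw [hi2, pvIter_absorb hr2] at this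
    rw [← hi1, this]

theorem pvIter_cell {total : Int} {parent : List Int} (uf : PvUF total parent)
    {x : Int} (hx : 0 ≤ x ∧ x < total) (d : Nat) :
    0 ≤ pvIter parent d x ∧ pvIter parent d x < total := by
  induction d with
  | zero => exact hx
  | succ d ih =>
      rw [show d + 1 = 1 + d by omega, pvIter, Function.iterate_add_apply]
      exact uf.rng _ (ih.1) (ih.2)

theorem pvFind_spec {parent : List Int} :
    ∀ (fuel : Nat) (x : Int), (∃ d < fuel, pvIsRoot parent (pvIter parent d x)) →
      pvRootRel parent x (pvFind parent fuel x) := by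
  intro fuel
  induction fuel with
  | zero =>
      intro x h
      exfalso
      obtain ⟨d, hd, _⟩ := h
      omega
  | succ fuel ih =>
      intro x h
      rw [pvFind]
      by_cases hroot : pvIGet parent x ≠ x
      · rw [if_pos hroot]
        obtain ⟨d, hd, hr⟩ := h
        have hd0 : d ≠ 0 := by
          rintro rfl
          exact hroot hr
        have h' : ∃ d' < fuel, pvIsRoot parent (pvIter parent d' (pvIGet parent x)) := by
          refine ⟨d - 1, by omega, ?_⟩
          rw [← pvIter_succ]
          have : d - 1 + 1 = d := by omega
          rw [this]
          exact hr
        obtain ⟨e, he, her⟩ := ih (pvIGet parent x) h'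
        exact ⟨e + 1, by rw [pvIter_succ]; exact he, her⟩
      · rw [if_neg hroot]
        push Not at hroot
        exact ⟨0, rfl, hroot⟩

theorem pvRootD_spec {total : Int} {parent : List Int} (uf : PvUF total parent)
    {x : Int} (hx : 0 ≤ x ∧ x < total) :
    pvRootRel parent x (pvRootD total parent x) := by
  obtain ⟨d, hd, hr⟩ := uf.term x hx.1 hx.2
  exact pvFind_spec (total.toNat + 1) x ⟨d, by have := pvNR_le total parent; omega, hr⟩

theorem pvRootD_eq {total : Int} {parent : List Int} (uf : PvUF total parent)
    {x r : Int} (hx : 0 ≤ x ∧ x < total) (h : pvRootRel parent x r) :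
    pvRootD total parent x = r :=
  pvRootRel_unique (pvRootD_spec uf hx) h

theorem pvRootD_cell {total : Int} {parent : List Int} (uf : PvUF total parent)
    {x : Int} (hx : 0 ≤ x ∧ x < total) :
    0 ≤ pvRootD total parent x ∧ pvRootD total parent x < total := by
  obtain ⟨d, hd, _⟩ := pvRootD_spec uf hx
  rw [← hd]
  exact pvIter_cell uf hx d

theorem pvRootD_isRoot {total : Int} {parent : List Int} (uf : PvUF total parent)
    {x : Int} (hx : 0 ≤ x ∧ x < total) :
    pvIsRoot parent (pvRootD total parent x) :=
  (pvRootD_spec uf hx).choose_spec.2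

theorem pvRootD_of_isRoot {total : Int} {parent : List Int} (uf : PvUF total parent)
    {r : Int} (hr : 0 ≤ r ∧ r < total) (h : pvIsRoot parent r) :
    pvRootD total parent r = r :=
  pvRootD_eq uf hr ⟨0, rfl, h⟩

theorem pvIGet_pvISet {parent : List Int} {total c v y : Int}
    (hlen : parent.length = total.toNat)
    (hc : 0 ≤ c ∧ c < total) (hy : 0 ≤ y ∧ y < total) :
    pvIGet (pvISet parent c v) y = if y = c then v else pvIGet parent y := by
  have hct : c.toNat < parent.length := by omega
  have hyt : y.toNat < parent.length := by omega
  rw [pvISet, pvIGet, pvPySetD_eq_set _ _ hc.1 (by omega),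
    PySem.List.pyGetD_eq_getElem _ _ hy.1 (by rw [List.length_set]; omega),
    List.getElem_set]
  by_cases hyc : y = c
  · rw [if_pos (by omega), if_pos hyc]
  · rw [if_neg (by omega), if_neg hyc, pvIGet,
      PySem.List.pyGetD_eq_getElem _ _ hy.1 (by omega)]

/-- extract a minimal-length root path. -/
theorem pvRootRel_minimal {parent : List Int} {x r : Int} (h : pvRootRel parent x r) :
    ∃ d, pvIter parent d x = r ∧ pvIsRoot parent r ∧
      ∀ e < d, ¬ pvIsRoot parent (pvIter parent e x) := by
  obtain ⟨d, hd, hr⟩ := h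
  induction d using Nat.strong_induction_on generalizing x with
  | _ d ih =>
      by_cases hmin : ∀ e < d, ¬ pvIsRoot parent (pvIter parent e x)
      · exact ⟨d, hd, hr, hmin⟩
      · push Not at hmin
        obtain ⟨e, he, her⟩ := hmin
        have hre : pvIter parent e x = r := by
          have : pvIter parent d x = pvIter parent (d - e) (pvIter parent e x) := by
            rw [pvIter, pvIter, pvIter, ← Function.iterate_add_apply]
            congr 1
            omega
          rw [pvIter_absorb her] at this
          rw [← hd, this]
        exact ih e he hre

/-- effect of linking root `c` under root `r'` on root paths. -/
theorem pvLink_path {total : Int} {parent : List Int} (uf : PvUF total parent)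
    {c r' : Int} (hc : 0 ≤ c ∧ c < total) (hr' : 0 ≤ r' ∧ r' < total)
    (hcr : pvIsRoot parent c) (hrr : pvIsRoot parent r') (hne : c ≠ r') :
    ∀ (d : Nat) (x ρ : Int), (0 ≤ x ∧ x < total) → pvIter parent d x = ρ →
      pvIsRoot parent ρ → (∀ e < d, ¬ pvIsRoot parent (pvIter parent e x)) →
      ∃ d', d' ≤ d + 1 ∧ pvIter (pvISet parent c r') d' x = (if ρ = c then r' else ρ) ∧
        pvIsRoot (pvISet parent c r') (if ρ = c then r' else ρ) := by
  have hget : ∀ y, 0 ≤ y ∧ y < total →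
      pvIGet (pvISet parent c r') y = if y = c then r' else pvIGet parent y :=
    fun y hy => pvIGet_pvISet uf.len hc hy
  have hrootr' : pvIsRoot (pvISet parent c r') r' := by
    rw [pvIsRoot, hget r' hr', if_neg (fun h => hne h.symm)]
    exact hrr
  intro d
  induction d with
  | zero =>
      intro x ρ hx hiter hρ _
      rw [pvIter_zero] at hiter
      subst hiter
      by_cases hxc : x = c
      · subst hxc
        rw [if_pos rfl]
        refine ⟨1, by omega, ?_, hrootr'⟩
        rw [pvIter_succ, hget _ hc, if_pos rfl, pvIter_zero]
      · rw [if_neg hxc]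
        refine ⟨0, by omega, rfl, ?_⟩
        rw [pvIsRoot, hget _ hx, if_neg hxc]
        exact hρ
  | succ d ih =>
      intro x ρ hx hiter hρ hmin
      have hnr : ¬ pvIsRoot parent x := by
        have := hmin 0 (by omega)
        rwa [pvIter_zero] at this
      have hxc : x ≠ c := fun h => hnr (h ▸ hcr)
      have hx1 : 0 ≤ pvIGet parent x ∧ pvIGet parent x < total := uf.rng x hx.1 hx.2
      have hiter1 : pvIter parent d (pvIGet parent x) = ρ := by
        rw [← pvIter_succ]; exact hiter
      have hmin1 : ∀ e < d, ¬ pvIsRoot parent (pvIter parent e (pvIGet parent x)) := by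
        intro e he
        have := hmin (e + 1) (by omega)
        rwa [pvIter_succ] at this
      obtain ⟨d', hd', hiter', hroot'⟩ := ih (pvIGet parent x) ρ hx1 hiter1 hρ hmin1
      refine ⟨d' + 1, by omega, ?_, hroot'⟩
      rw [pvIter_succ, hget _ hx, if_neg hxc]
      exact hiter'

theorem pvLink_UF {total : Int} {parent : List Int} (uf : PvUF total parent)
    {c r' : Int} (hc : 0 ≤ c ∧ c < total) (hr' : 0 ≤ r' ∧ r' < total)
    (hcr : pvIsRoot parent c) (hrr : pvIsRoot parent r') (hne : c ≠ r') :
    PvUF total (pvISet parent c r') := by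
  have hget : ∀ y, 0 ≤ y ∧ y < total →
      pvIGet (pvISet parent c r') y = if y = c then r' else pvIGet parent y :=
    fun y hy => pvIGet_pvISet uf.len hc hy
  have hNR : pvNR total (pvISet parent c r') = pvNR total parent + 1 := by
    rw [pvNR, pvNR]
    have hseteq : (Finset.Ico (0 : Int) total).filter
        (fun x => pvIGet (pvISet parent c r') x ≠ x)
        = insert c ((Finset.Ico (0 : Int) total).filter (fun x => pvIGet parent x ≠ x)) := by
      ext z
      simp only [Finset.mem_filter, Finset.mem_insert, Finset.mem_Ico]
      constructor
      · rintro ⟨hz, hzne⟩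
        by_cases hzc : z = c
        · exact Or.inl hzc
        · rw [hget z ⟨hz.1, hz.2⟩, if_neg hzc] at hzne
          exact Or.inr ⟨hz, hzne⟩
      · rintro (rfl | ⟨hz, hzne⟩)
        · refine ⟨⟨hc.1, hc.2⟩, ?_⟩
          rw [hget _ hc, if_pos rfl]
          exact fun h => hne h.symm
        · refine ⟨hz, ?_⟩
          by_cases hzc : z = c
          · subst hzc
            exact absurd hcr hzne
          · rw [hget z ⟨hz.1, hz.2⟩, if_neg hzc]
            exact hzne
    rw [hseteq, Finset.card_insert_of_notMem (by
      simp only [Finset.mem_filter, not_and]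
      intro _
      simpa using hcr)]
  refine ⟨?_, ?_, ?_⟩
  · rw [pvISet, pvPySetD_eq_set _ _ hc.1 (by rw [uf.len]; omega), List.length_set]
    exact uf.len
  · intro x hx1 hx2
    rw [hget x ⟨hx1, hx2⟩]
    split_ifs
    · exact hr'
    · exact uf.rng x hx1 hx2
  · intro x hx1 hx2
    obtain ⟨d0, _, hr0⟩ := uf.term x hx1 hx2
    obtain ⟨d, hiter, hρ, hmin⟩ := pvRootRel_minimal ⟨d0, rfl, hr0⟩
    have hdle : d ≤ pvNR total parent := by
      obtain ⟨d1, hd1, hr1⟩ := uf.term x hx1 hx2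
      by_contra hgt
      exact hmin d1 (by omega) hr1
    obtain ⟨d', hd', hiter', hroot'⟩ := pvLink_path uf hc hr' hcr hrr hne d x
      (pvIter parent d0 x) ⟨hx1, hx2⟩ hiter hρ hmin
    exact ⟨d', by omega, hiter' ▸ hroot'⟩

theorem pvLink_rootD {total : Int} {parent : List Int} (uf : PvUF total parent)
    {c r' : Int} (hc : 0 ≤ c ∧ c < total) (hr' : 0 ≤ r' ∧ r' < total)
    (hcr : pvIsRoot parent c) (hrr : pvIsRoot parent r') (hne : c ≠ r')
    {x : Int} (hx : 0 ≤ x ∧ x < total) :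
    pvRootD total (pvISet parent c r') x =
      (if pvRootD total parent x = c then r' else pvRootD total parent x) := by
  obtain ⟨d, hiter, hρ, hmin⟩ := pvRootRel_minimal (pvRootD_spec uf hx)
  obtain ⟨d', _, hiter', hroot'⟩ := pvLink_path uf hc hr' hcr hrr hne d x
    (pvRootD total parent x) hx hiter hρ hmin
  exact pvRootD_eq (pvLink_UF uf hc hr' hcr hrr hne) hx ⟨d', hiter', hroot'⟩

/-! ### the equivalence closure of the union pairs -/

def pvECl (pairs : List (Int × Int)) (x y : Int) : Prop :=
  Relation.EqvGen (fun a b => (a, b) ∈ pairs) x y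

theorem pvECl_refl (pairs : List (Int × Int)) (x : Int) : pvECl pairs x x :=
  Relation.EqvGen.refl x

theorem pvECl_symm {pairs : List (Int × Int)} {x y : Int} (h : pvECl pairs x y) :
    pvECl pairs y x := Relation.EqvGen.symm x y h

theorem pvECl_trans {pairs : List (Int × Int)} {x y z : Int}
    (h1 : pvECl pairs x y) (h2 : pvECl pairs y z) : pvECl pairs x z :=
  Relation.EqvGen.trans x y z h1 h2

theorem pvECl_mono {pairs pairs' : List (Int × Int)} {x y : Int}
    (hsub : ∀ ab ∈ pairs, ab ∈ pairs') (h : pvECl pairs x y) : pvECl pairs' x y :=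
  Relation.EqvGen.mono (fun a b hab => hsub (a, b) hab) h

theorem pvECl_nil {x y : Int} (h : pvECl [] x y) : x = y := by
  induction h with
  | rel _ _ hab => simp at hab
  | refl _ => rfl
  | symm _ _ _ ih => exact ih.symm
  | trans _ _ _ _ _ ih1 ih2 => exact ih1.trans ih2

theorem pvECl_append {pairs : List (Int × Int)} {a b x y : Int} :
    pvECl (pairs ++ [(a, b)]) x y ↔
      pvECl pairs x y ∨ (pvECl pairs x a ∧ pvECl pairs b y) ∨
      (pvECl pairs x b ∧ pvECl pairs a y) := by
  constructor
  · intro h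
    induction h with
    | rel u v huv =>
        rcases List.mem_append.mp huv with h | h
        · exact Or.inl (Relation.EqvGen.rel u v h)
        · rcases List.mem_singleton.mp h with h
          have hu : u = a := congrArg Prod.fst h
          have hv : v = b := congrArg Prod.snd h
          subst hu; subst hv
          exact Or.inr (Or.inl ⟨pvECl_refl _ _, pvECl_refl _ _⟩)
    | refl u => exact Or.inl (pvECl_refl _ _)
    | symm u v _ ih =>
        rcases ih with h | ⟨h1, h2⟩ | ⟨h1, h2⟩
        · exact Or.inl (pvECl_symm h)
        · exact Or.inr (Or.inr ⟨pvECl_symm h2, pvECl_symm h1⟩)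
        · exact Or.inr (Or.inl ⟨pvECl_symm h2, pvECl_symm h1⟩)
    | trans u v w _ _ ih1 ih2 =>
        rcases ih1 with h | ⟨h1, h2⟩ | ⟨h1, h2⟩ <;>
          rcases ih2 with h' | ⟨h1', h2'⟩ | ⟨h1', h2'⟩
        · exact Or.inl (pvECl_trans h h')
        · exact Or.inr (Or.inl ⟨pvECl_trans h h1', h2'⟩)
        · exact Or.inr (Or.inr ⟨pvECl_trans h h1', h2'⟩)
        · exact Or.inr (Or.inl ⟨h1, pvECl_trans h2 h'⟩)
        · exact Or.inr (Or.inl ⟨h1, h2'⟩)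
        · exact Or.inl (pvECl_trans h1 h2')
        · exact Or.inr (Or.inr ⟨h1, pvECl_trans h2 h'⟩)
        · exact Or.inl (pvECl_trans h1 h2')
        · exact Or.inr (Or.inr ⟨h1, h2'⟩)
  · intro h
    have hmono : ∀ u v, pvECl pairs u v → pvECl (pairs ++ [(a, b)]) u v :=
      fun u v h' => pvECl_mono (fun ab hab => List.mem_append_left _ hab) h'
    have hab : pvECl (pairs ++ [(a, b)]) a b :=
      Relation.EqvGen.rel a b (List.mem_append_right _ (by simp))
    rcases h with h | ⟨h1, h2⟩ | ⟨h1, h2⟩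
    · exact hmono _ _ h
    · exact pvECl_trans (pvECl_trans (hmono _ _ h1) hab) (hmono _ _ h2)
    · exact pvECl_trans (pvECl_trans (hmono _ _ h1) (pvECl_symm hab)) (hmono _ _ h2)

/-! ### the union pairs of the scan -/

def pvIdx (n : Int) (p : Int × Int) : Int := p.1 * n + p.2

theorem pvIdx_cell {m n : Int} {p : Int × Int} (hp : pvInB m n p) :
    0 ≤ pvIdx n p ∧ pvIdx n p < m * n := by
  obtain ⟨h1, h2, h3, h4⟩ := hp
  constructor
  · have := mul_nonneg h1 (by omega : (0 : Int) ≤ n)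
    rw [pvIdx]; omega
  · rw [pvIdx]
    have hstep : p.1 * n + p.2 < (p.1 + 1) * n := by nlinarith
    have hmul : (p.1 + 1) * n ≤ m * n := by
      apply mul_le_mul_of_nonneg_right (by omega) (by omega)
    omega

theorem pvIdx_inj {m n : Int} {p q : Int × Int} (hp : pvInB m n p) (hq : pvInB m n q)
    (h : pvIdx n p = pvIdx n q) : p = q := by
  obtain ⟨h1, h2, h3, h4⟩ := hp
  obtain ⟨h5, h6, h7, h8⟩ := hq
  rw [pvIdx, pvIdx] at h
  have hfst : p.1 = q.1 := by
    rcases lt_trichotomy p.1 q.1 with hlt | heq | hgt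
    · exfalso
      have : (p.1 + 1) * n ≤ q.1 * n := mul_le_mul_of_nonneg_right (by omega) (by omega)
      nlinarith
    · exact heq
    · exfalso
      have : (q.1 + 1) * n ≤ p.1 * n := mul_le_mul_of_nonneg_right (by omega) (by omega)
      nlinarith
  have hsnd : p.2 = q.2 := by
    rw [hfst] at h
    omega
  exact Prod.ext hfst hsnd

/-- the clamped cell count `max(m,0)*max(n,0)` Source B sizes its arrays with. -/
def pvTot (m n : Int) : Int := max m 0 * max n 0

theorem pvTot_eq {m n : Int} {p : Int × Int} (hp : pvInB m n p) : pvTot m n = m * n := by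
  obtain ⟨h1, h2, h3, h4⟩ := hp
  rw [pvTot, max_eq_left (by omega : (0 : Int) ≤ m), max_eq_left (by omega : (0 : Int) ≤ n)]

def pvPairsAt (picture : List (List Int)) (m n : Int) (p : Int × Int) : List (Int × Int) :=
  if pvGet picture p.1 p.2 = 0 then []
  else
    (if p.2 + 1 < n ∧ pvGet picture p.1 (p.2 + 1) = pvGet picture p.1 p.2 then
      [(p.1 * n + p.2, p.1 * n + p.2 + 1)] else []) ++
    (if p.1 + 1 < m ∧ pvGet picture (p.1 + 1) p.2 = pvGet picture p.1 p.2 then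
      [(p.1 * n + p.2, (p.1 + 1) * n + p.2)] else [])

def pvPairsOf (picture : List (List Int)) (m n : Int) (P : List (Int × Int)) :
    List (Int × Int) := P.flatMap (pvPairsAt picture m n)

structure PvUFS (total : Int) (pairs : List (Int × Int)) (parent : List Int) : Prop where
  uf : PvUF total parent
  pcells : ∀ ab ∈ pairs, (0 ≤ ab.1 ∧ ab.1 < total) ∧ (0 ≤ ab.2 ∧ ab.2 < total)
  hiff : ∀ x y, 0 ≤ x → x < total → 0 ≤ y → y < total →
      (pvRootD total parent x = pvRootD total parent y ↔ pvECl pairs x y)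

theorem pvECl_append_absorb {pairs : List (Int × Int)} {a b x y : Int}
    (hab : pvECl pairs a b) :
    pvECl (pairs ++ [(a, b)]) x y ↔ pvECl pairs x y := by
  rw [pvECl_append]
  constructor
  · rintro (h | ⟨h1, h2⟩ | ⟨h1, h2⟩)
    · exact h
    · exact pvECl_trans (pvECl_trans h1 hab) h2
    · exact pvECl_trans (pvECl_trans h1 (pvECl_symm hab)) h2
  · exact Or.inl

theorem pvLinkPair_UFS {total : Int} {pairs : List (Int × Int)} {parent : List Int}
    (h : PvUFS total pairs parent) {a b c r' : Int}
    (ha : 0 ≤ a ∧ a < total) (hb : 0 ≤ b ∧ b < total)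
    (hcase : (c = pvRootD total parent a ∧ r' = pvRootD total parent b) ∨
             (c = pvRootD total parent b ∧ r' = pvRootD total parent a))
    (hne : pvRootD total parent a ≠ pvRootD total parent b) :
    PvUFS total (pairs ++ [(a, b)]) (pvISet parent c r') := by
  have hra := pvRootD_cell h.uf ha
  have hrb := pvRootD_cell h.uf hb
  have hrra := pvRootD_isRoot h.uf ha
  have hrrb := pvRootD_isRoot h.uf hb
  have hc : 0 ≤ c ∧ c < total := by rcases hcase with ⟨rfl, _⟩ | ⟨rfl, _⟩ <;> assumption
  have hr' : 0 ≤ r' ∧ r' < total := by rcases hcase with ⟨_, rfl⟩ | ⟨_, rfl⟩ <;> assumption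
  have hcroot : pvIsRoot parent c := by rcases hcase with ⟨rfl, _⟩ | ⟨rfl, _⟩ <;> assumption
  have hrroot : pvIsRoot parent r' := by rcases hcase with ⟨_, rfl⟩ | ⟨_, rfl⟩ <;> assumption
  have hcne : c ≠ r' := by
    rcases hcase with ⟨rfl, rfl⟩ | ⟨rfl, rfl⟩
    · exact hne
    · exact hne.symm
  have huf' := pvLink_UF h.uf hc hr' hcroot hrroot hcne
  refine ⟨huf', ?_, ?_⟩
  · intro ab hab
    rcases List.mem_append.mp hab with hab | hab
    · exact h.pcells ab hab
    · rcases List.mem_singleton.mp hab with rfl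
      exact ⟨ha, hb⟩
  · intro x y hx1 hx2 hy1 hy2
    rw [pvLink_rootD h.uf hc hr' hcroot hrroot hcne ⟨hx1, hx2⟩,
      pvLink_rootD h.uf hc hr' hcroot hrroot hcne ⟨hy1, hy2⟩, pvECl_append]
    have hxa := h.hiff x a hx1 hx2 ha.1 ha.2
    have hxb := h.hiff x b hx1 hx2 hb.1 hb.2
    have hya := h.hiff y a hy1 hy2 ha.1 ha.2
    have hyb := h.hiff y b hy1 hy2 hb.1 hb.2
    have hxy := h.hiff x y hx1 hx2 hy1 hy2
    have hsymm : ∀ u v (huv : pvECl pairs u v), pvECl pairs v u := fun u v huv => pvECl_symm huv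
    rcases hcase with ⟨rfl, rfl⟩ | ⟨rfl, rfl⟩
    · constructor
      · intro hsub
        split_ifs at hsub with hx hy hy
        · exact Or.inl (pvECl_trans (hxa.mp hx) (hsymm _ _ (hya.mp hy)))
        · exact Or.inr (Or.inl ⟨hxa.mp hx, hsymm _ _ (hyb.mp hsub.symm)⟩)
        · exact Or.inr (Or.inr ⟨hxb.mp hsub, hsymm _ _ (hya.mp hy)⟩)
        · exact Or.inl (hxy.mp hsub)
      · rintro (hxy' | ⟨h1, h2⟩ | ⟨h1, h2⟩)
        · rw [hxy.mpr hxy']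
        · rw [if_pos (hxa.mpr h1), if_neg (by
            rw [hyb.mpr (hsymm _ _ h2)]; exact hne.symm)]
          exact (hyb.mpr (hsymm _ _ h2)).symm
        · rw [if_neg (by rw [hxb.mpr h1]; exact hne.symm), if_pos (hya.mpr (hsymm _ _ h2)),
            hxb.mpr h1]
    · constructor
      · intro hsub
        split_ifs at hsub with hx hy hy
        · exact Or.inl (pvECl_trans (hxb.mp hx) (hsymm _ _ (hyb.mp hy)))
        · exact Or.inr (Or.inr ⟨hxb.mp hx, hsymm _ _ (hya.mp hsub.symm)⟩)
        · exact Or.inr (Or.inl ⟨hxa.mp hsub, hsymm _ _ (hyb.mp hy)⟩)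
        · exact Or.inl (hxy.mp hsub)
      · rintro (hxy' | ⟨h1, h2⟩ | ⟨h1, h2⟩)
        · rw [hxy.mpr hxy']
        · rw [if_neg (by rw [hxa.mpr h1]; exact hne), if_pos (hyb.mpr (hsymm _ _ h2)),
            hxa.mpr h1]
        · rw [if_pos (hxb.mpr h1), if_neg (by rw [hya.mpr (hsymm _ _ h2)]; exact hne)]
          exact (hya.mpr (hsymm _ _ h2)).symm

theorem pvRootD_def (total : Int) (parent : List Int) (x : Int) :
    pvFind parent (total.toNat + 1) x = pvRootD total parent x := rfl

theorem pvUnion_UFS {total : Int} {pairs : List (Int × Int)}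
    {st : List Int × List Int} (h : PvUFS total pairs st.1) {a b : Int}
    (ha : 0 ≤ a ∧ a < total) (hb : 0 ≤ b ∧ b < total) :
    PvUFS total (pairs ++ [(a, b)]) (pvUnion total st a b).1 := by
  rw [pvUnion]
  simp only [pvRootD_def]
  by_cases heq : pvRootD total st.1 a = pvRootD total st.1 b
  · rw [if_pos heq]
    refine ⟨h.uf, ?_, ?_⟩
    · intro ab hab
      rcases List.mem_append.mp hab with hab | hab
      · exact h.pcells ab hab
      · rcases List.mem_singleton.mp hab with rfl
        exact ⟨ha, hb⟩
    · intro x y hx1 hx2 hy1 hy2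
      rw [pvECl_append_absorb ((h.hiff a b ha.1 ha.2 hb.1 hb.2).mp heq)]
      exact h.hiff x y hx1 hx2 hy1 hy2
  · rw [if_neg heq]
    by_cases hsz : pvIGet st.2 (pvRootD total st.1 a) < pvIGet st.2 (pvRootD total st.1 b)
    · rw [if_pos hsz]
      show PvUFS total (pairs ++ [(a, b)])
        (pvISet st.1 (pvRootD total st.1 a) (pvRootD total st.1 b))
      exact pvLinkPair_UFS h ha hb (Or.inl ⟨rfl, rfl⟩) heq
    · rw [if_neg hsz]
      show PvUFS total (pairs ++ [(a, b)])
        (pvISet st.1 (pvRootD total st.1 b) (pvRootD total st.1 a))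
      exact pvLinkPair_UFS h ha hb (Or.inr ⟨rfl, rfl⟩) heq

theorem pvPairsOf_append (picture : List (List Int)) (m n : Int)
    (P : List (Int × Int)) (p : Int × Int) :
    pvPairsOf picture m n (P ++ [p]) = pvPairsOf picture m n P ++ pvPairsAt picture m n p := by
  rw [pvPairsOf, pvPairsOf, List.flatMap_append]
  simp

theorem pvUnionStep_UFS {m n : Int} {picture : List (List Int)} {P : List (Int × Int)}
    {p : Int × Int} (hp : pvInB m n p) {st : List Int × List Int}
    (h : PvUFS (pvTot m n) (pvPairsOf picture m n P) st.1) :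
    PvUFS (pvTot m n) (pvPairsOf picture m n (P ++ [p]))
      (pvUnionStep picture m n (pvTot m n) st p.1 p.2).1 := by
  have htot : pvTot m n = m * n := pvTot_eq hp
  obtain ⟨i, j⟩ := p
  rw [pvPairsOf_append, pvUnionStep, pvPairsAt]
  simp only
  by_cases h0 : pvGet picture i j = 0
  · rw [if_pos h0, if_pos h0, List.append_nil]
    exact h
  · rw [if_neg h0, if_neg h0]
    have hidx : 0 ≤ i * n + j ∧ i * n + j < pvTot m n := by
      have := pvIdx_cell hp
      rw [pvIdx] at this
      rw [htot]
      exact this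
    by_cases hr : j + 1 < n ∧ pvGet picture i (j + 1) = pvGet picture i j
    · rw [if_pos hr, if_pos hr]
      have hidxr : 0 ≤ i * n + j + 1 ∧ i * n + j + 1 < pvTot m n := by
        have := pvIdx_cell (show pvInB m n (i, j + 1) from
          ⟨hp.1, hp.2.1, by have := hp.2.2.1; omega, hr.1⟩)
        rw [pvIdx] at this
        simp only at this
        rw [htot]
        constructor <;> [linarith [this.1]; linarith [this.2]]
      have h1 := pvUnion_UFS h hidx hidxr
      by_cases hd : i + 1 < m ∧ pvGet picture (i + 1) j = pvGet picture i j
      · rw [if_pos hd, if_pos hd, ← List.append_assoc]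
        have hidxd : 0 ≤ (i + 1) * n + j ∧ (i + 1) * n + j < pvTot m n := by
          have := pvIdx_cell (show pvInB m n (i + 1, j) from
            ⟨by have := hp.1; omega, hd.1, hp.2.2.1, hp.2.2.2⟩)
          rw [pvIdx] at this
          rw [htot]
          exact this
        exact pvUnion_UFS h1 hidx hidxd
      · rw [if_neg hd, if_neg hd, List.append_nil]
        exact h1
    · rw [if_neg hr, if_neg hr, List.nil_append]
      by_cases hd : i + 1 < m ∧ pvGet picture (i + 1) j = pvGet picture i j
      · rw [if_pos hd, if_pos hd]
        have hidxd : 0 ≤ (i + 1) * n + j ∧ (i + 1) * n + j < pvTot m n := by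
          have := pvIdx_cell (show pvInB m n (i + 1, j) from
            ⟨by have := hp.1; omega, hd.1, hp.2.2.1, hp.2.2.2⟩)
          rw [pvIdx] at this
          rw [htot]
          exact this
        exact pvUnion_UFS h hidx hidxd
      · rw [if_neg hd, if_neg hd]
        simpa using h

theorem pvUFS_init (total : Int) :
    PvUFS total [] (PySem.List.pyRange 0 total 1) := by
  have hlen : (PySem.List.pyRange 0 total 1).length = total.toNat := by
    rw [PySem.List.length_pyRange_one]
    omega
  have hget : ∀ x, 0 ≤ x → x < total → pvIGet (PySem.List.pyRange 0 total 1) x = x := by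
    intro x h1 h2
    rw [pvIGet, PySem.List.pyGetD_eq_getElem _ _ h1 (by rw [hlen]; omega),
      PySem.List.getElem_pyRange_one]
    omega
  have huf : PvUF total (PySem.List.pyRange 0 total 1) := by
    refine ⟨hlen, ?_, ?_⟩
    · intro x h1 h2
      rw [hget x h1 h2]
      exact ⟨h1, h2⟩
    · intro x h1 h2
      exact ⟨0, by omega, by rw [pvIsRoot, pvIter_zero, hget x h1 h2]⟩
  refine ⟨huf, by simp, ?_⟩
  intro x y hx1 hx2 hy1 hy2
  rw [pvRootD_of_isRoot huf ⟨hx1, hx2⟩ (by rw [pvIsRoot, hget x hx1 hx2]),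
    pvRootD_of_isRoot huf ⟨hy1, hy2⟩ (by rw [pvIsRoot, hget y hy1 hy2])]
  constructor
  · rintro rfl
    exact pvECl_refl _ _
  · exact pvECl_nil

def pvBStepF (picture : List (List Int)) (m n : Int)
    (st : List Int × List Int) (p : Int × Int) : List Int × List Int :=
  pvUnionStep picture m n (pvTot m n) st p.1 p.2

theorem pvBFold (m n : Int) (picture : List (List Int)) :
    ∀ (rest P : List (Int × Int)) (st : List Int × List Int),
      pvScanL m n = P ++ rest → PvUFS (pvTot m n) (pvPairsOf picture m n P) st.1 →
      PvUFS (pvTot m n) (pvPairsOf picture m n (P ++ rest))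
        ((rest.foldl (pvBStepF picture m n) st).1) := by
  intro rest
  induction rest with
  | nil => intro P st _ h; simpa using h
  | cons p rest' ih =>
      intro P st hsplit h
      have hp : pvInB m n p := pvMem_scan.mp (by rw [hsplit]; simp)
      have hstep := pvUnionStep_UFS hp h
      have hsplit' : pvScanL m n = (P ++ [p]) ++ rest' := by
        rw [hsplit, List.append_assoc, List.singleton_append]
      have := ih (P ++ [p]) (pvBStepF picture m n st p) hsplit' hstep
      rw [List.append_assoc, List.singleton_append] at this
      simpa using this

/-! ### union pairs generate exactly the adjacency reachability -/

theorem pvPairsAt_mem {picture : List (List Int)} {m n : Int} {p : Int × Int}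
    {u v : Int} :
    (u, v) ∈ pvPairsAt picture m n p ↔
      pvGet picture p.1 p.2 ≠ 0 ∧
      ((p.2 + 1 < n ∧ pvGet picture p.1 (p.2 + 1) = pvGet picture p.1 p.2 ∧
          u = p.1 * n + p.2 ∧ v = p.1 * n + p.2 + 1) ∨
       (p.1 + 1 < m ∧ pvGet picture (p.1 + 1) p.2 = pvGet picture p.1 p.2 ∧
          u = p.1 * n + p.2 ∧ v = (p.1 + 1) * n + p.2)) := by
  rw [pvPairsAt]
  by_cases h0 : pvGet picture p.1 p.2 = 0
  · rw [if_pos h0]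
    simp [h0]
  · rw [if_neg h0]
    simp only [List.mem_append, List.mem_ite_nil_right, List.mem_singleton, Prod.mk.injEq]
    constructor
    · rintro (⟨⟨hc1, hc2⟩, hu, hv⟩ | ⟨⟨hc1, hc2⟩, hu, hv⟩)
      · exact ⟨h0, Or.inl ⟨hc1, hc2, hu, hv⟩⟩
      · exact ⟨h0, Or.inr ⟨hc1, hc2, hu, hv⟩⟩
    · rintro ⟨_, ⟨hc1, hc2, hu, hv⟩ | ⟨hc1, hc2, hu, hv⟩⟩
      · exact Or.inl ⟨⟨hc1, hc2⟩, hu, hv⟩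
      · exact Or.inr ⟨⟨hc1, hc2⟩, hu, hv⟩

theorem pvPair_reach {m n : Int} {picture : List (List Int)} {u v : Int}
    (h : (u, v) ∈ pvPairsOf picture m n (pvScanL m n)) :
    ∃ p q, pvInB m n p ∧ pvInB m n q ∧ u = pvIdx n p ∧ v = pvIdx n q ∧
      pvE m n picture p q := by
  obtain ⟨p, hps, hmem⟩ := List.mem_flatMap.mp h
  have hp : pvInB m n p := pvMem_scan.mp hps
  obtain ⟨hp1, hp2, hp3, hp4⟩ := hp
  rw [pvPairsAt_mem] at hmem
  obtain ⟨h0, hcase⟩ := hmem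
  rcases hcase with ⟨hc1, hc2, hu, hv⟩ | ⟨hc1, hc2, hu, hv⟩
  · refine ⟨p, (p.1, p.2 + 1), ⟨hp1, hp2, hp3, hp4⟩, ⟨hp1, hp2, by omega, hc1⟩,
      hu, ?_, ?_⟩
    · rw [hv]
      show p.1 * n + p.2 + 1 = p.1 * n + (p.2 + 1)
      ring
    · exact ⟨⟨hp1, hp2, hp3, hp4⟩, ⟨hp1, hp2, by omega, hc1⟩, h0, hc2,
        Or.inr (Or.inl ⟨rfl, rfl⟩)⟩
  · refine ⟨p, (p.1 + 1, p.2), ⟨hp1, hp2, hp3, hp4⟩, ⟨by omega, hc1, hp3, hp4⟩,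
      hu, ?_, ?_⟩
    · rw [hv]
      rfl
    · exact ⟨⟨hp1, hp2, hp3, hp4⟩, ⟨by omega, hc1, hp3, hp4⟩, h0, hc2,
        Or.inl ⟨rfl, rfl⟩⟩

theorem pvE_to_pair {m n : Int} {picture : List (List Int)} {x y : Int × Int}
    (hE : pvE m n picture x y) :
    pvECl (pvPairsOf picture m n (pvScanL m n)) (pvIdx n x) (pvIdx n y) := by
  obtain ⟨hx, hy, h0, hval, hdir⟩ := hE
  obtain ⟨hx1, hx2, hx3, hx4⟩ := hx
  obtain ⟨hy1, hy2, hy3, hy4⟩ := hy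
  have hxs : x ∈ pvScanL m n := pvMem_scan.mpr ⟨hx1, hx2, hx3, hx4⟩
  have hys : y ∈ pvScanL m n := pvMem_scan.mpr ⟨hy1, hy2, hy3, hy4⟩
  rcases hdir with ⟨h1, h2⟩ | ⟨h1, h2⟩ | ⟨h1, h2⟩ | ⟨h1, h2⟩
  · -- y is below x : pair generated at x (down)
    apply Relation.EqvGen.rel
    apply List.mem_flatMap.mpr
    refine ⟨x, hxs, ?_⟩
    rw [pvPairsAt_mem]
    refine ⟨h0, Or.inr ⟨by omega, ?_, rfl, ?_⟩⟩
    · conv_lhs => rw [show x.1 + 1 = y.1 by omega, show x.2 = y.2 by omega]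
      exact hval
    · rw [pvIdx, h1, h2]
  · -- y is to the right of x : pair generated at x (right)
    apply Relation.EqvGen.rel
    apply List.mem_flatMap.mpr
    refine ⟨x, hxs, ?_⟩
    rw [pvPairsAt_mem]
    refine ⟨h0, Or.inl ⟨by omega, ?_, rfl, ?_⟩⟩
    · conv_lhs => rw [show x.2 + 1 = y.2 by omega, show x.1 = y.1 by omega]
      exact hval
    · rw [pvIdx, h1, h2]
      ring
  · -- y is above x : pair generated at y (down), reversed
    apply Relation.EqvGen.symm
    apply Relation.EqvGen.rel
    apply List.mem_flatMap.mpr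
    refine ⟨y, hys, ?_⟩
    rw [pvPairsAt_mem]
    refine ⟨by rw [hval]; exact h0, Or.inr ⟨by omega, ?_, rfl, ?_⟩⟩
    · conv_lhs => rw [show y.1 + 1 = x.1 by omega, show y.2 = x.2 by omega]
      exact hval.symm
    · rw [pvIdx, show x.1 = y.1 + 1 by omega, show x.2 = y.2 by omega]
  · -- y is to the left of x : pair generated at y (right), reversed
    apply Relation.EqvGen.symm
    apply Relation.EqvGen.rel
    apply List.mem_flatMap.mpr
    refine ⟨y, hys, ?_⟩
    rw [pvPairsAt_mem]
    refine ⟨by rw [hval]; exact h0, Or.inl ⟨by omega, ?_, rfl, ?_⟩⟩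
    · conv_lhs => rw [show y.2 + 1 = x.2 by omega, show y.1 = x.1 by omega]
      exact hval.symm
    · rw [pvIdx, show x.1 = y.1 by omega, show x.2 = y.2 + 1 by omega]
      ring

theorem pvECl_to_reach {m n : Int} {picture : List (List Int)} {u v : Int}
    (h : pvECl (pvPairsOf picture m n (pvScanL m n)) u v) :
    u = v ∨ ∃ p q, pvInB m n p ∧ pvInB m n q ∧ u = pvIdx n p ∧ v = pvIdx n q ∧
      pvReach m n picture p q := by
  induction h with
  | rel a b hab =>
      obtain ⟨p, q, hp, hq, hu, hv, hE⟩ := pvPair_reach hab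
      exact Or.inr ⟨p, q, hp, hq, hu, hv, Relation.ReflTransGen.single hE⟩
  | refl a => exact Or.inl rfl
  | symm a b _ ih =>
      rcases ih with rfl | ⟨p, q, hp, hq, hu, hv, hr⟩
      · exact Or.inl rfl
      · exact Or.inr ⟨q, p, hq, hp, hv, hu, pvReach_symm hr⟩
  | trans a b c _ _ ih1 ih2 =>
      rcases ih1 with rfl | ⟨p, q, hp, hq, hu, hv, hr⟩
      · exact ih2
      · rcases ih2 with rfl | ⟨p', q', hp', hq', hu', hv', hr'⟩
        · exact Or.inr ⟨p, q, hp, hq, hu, hv, hr⟩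
        · have : q = p' := pvIdx_inj hq hp' (by rw [← hv, hu'])
          subst this
          exact Or.inr ⟨p, q', hp, hq', hu, hv', pvReach_trans hr hr'⟩

theorem pvECl_iff_reach {m n : Int} {picture : List (List Int)} {p q : Int × Int}
    (hp : pvInB m n p) (hq : pvInB m n q) :
    pvECl (pvPairsOf picture m n (pvScanL m n)) (pvIdx n p) (pvIdx n q) ↔
      pvReach m n picture p q := by
  constructor
  · intro h
    rcases pvECl_to_reach h with heq | ⟨p', q', hp', hq', hu, hv, hr⟩
    · rw [pvIdx_inj hp hq heq]
      exact Relation.ReflTransGen.refl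
    · rw [pvIdx_inj hp hp' hu, pvIdx_inj hq hq' hv]
      exact hr
  · intro h
    induction h with
    | refl => exact pvECl_refl _ _
    | tail hr hE ih =>
        exact pvECl_trans (ih (pvComp_inB hp hr)) (pvE_to_pair hE)

/-! ### B's counting pass -/

def pvCStepF (picture : List (List Int)) (m n : Int) (parent : List Int)
    (d : PySem.Dict Int Int) (p : Int × Int) : PySem.Dict Int Int :=
  if pvGet picture p.1 p.2 ≠ 0 then
    d.modify (pvFind parent ((pvTot m n).toNat + 1) (p.1 * n + p.2)) 0 (· + 1)
  else d

def pvUFFinal (m n : Int) (picture : List (List Int)) : List Int × List Int :=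
  (pvScanL m n).foldl (pvBStepF picture m n)
    (PySem.List.pyRange 0 (pvTot m n) 1, List.replicate (pvTot m n).toNat 1)

def pvCountsFinal (m n : Int) (picture : List (List Int)) : PySem.Dict Int Int :=
  (pvScanL m n).foldl (pvCStepF picture m n (pvUFFinal m n picture).1) PySem.Dict.empty

theorem pvB_form (m n : Int) (picture : List (List Int)) :
    Solution_alt m n picture =
      [(((pvCountsFinal m n picture).size : Nat) : Int),
       (match PySem.List.max? (pvCountsFinal m n picture).values (fun v => v) with
        | some v => v
        | none => 0)] := by
  simp only [Solution_alt, pvCountsFinal, pvUFFinal, pvScanL, List.foldl_flatMap,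
    List.foldl_map, pvBStepF, pvCStepF, pvTot]

/-- the list of roots of the nonzero cells, in scan order. -/
def pvKeys (m n : Int) (picture : List (List Int)) (parent : List Int)
    (P : List (Int × Int)) : List Int :=
  (P.filter (fun p => !(pvGet picture p.1 p.2 == 0))).map
    (fun p => pvRootD (pvTot m n) parent (pvIdx n p))

theorem pvCount_fold (m n : Int) (picture : List (List Int)) (parent : List Int) :
    ∀ (l : List (Int × Int)) (d0 : PySem.Dict Int Int),
      l.foldl (pvCStepF picture m n parent) d0 =
        ((l.filter (fun p => !(pvGet picture p.1 p.2 == 0))).map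
          (fun p => pvRootD (pvTot m n) parent (pvIdx n p))).foldl
          (fun d x => d.modify x 0 (· + 1)) d0 := by
  intro l
  induction l with
  | nil => intro d0; rfl
  | cons p l ih =>
      intro d0
      rw [List.foldl_cons, List.filter_cons]
      by_cases h0 : pvGet picture p.1 p.2 = 0
      · have hcond : ¬ ((!(pvGet picture p.1 p.2 == 0)) = true) := by simp [h0]
        rw [pvCStepF, if_neg (by simpa using h0), if_neg hcond]
        exact ih d0
      · have hcond : (!(pvGet picture p.1 p.2 == 0)) = true := by simp [h0]
        rw [pvCStepF, if_pos h0, if_pos hcond, List.map_cons, List.foldl_cons, ih]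
        rfl

theorem pvCounts_eq_counter (m n : Int) (picture : List (List Int)) (parent : List Int) :
    (pvScanL m n).foldl (pvCStepF picture m n parent) PySem.Dict.empty =
      PySem.Dict.counter (pvKeys m n picture parent (pvScanL m n)) := by
  rw [pvCount_fold, pvKeys]
  rfl

noncomputable def pvRootKey (m n : Int) (picture : List (List Int)) (p : Int × Int) : Int :=
  pvRootD (pvTot m n) (pvUFFinal m n picture).1 (pvIdx n p)

theorem pvUFS_final (m n : Int) (picture : List (List Int)) :
    PvUFS (pvTot m n) (pvPairsOf picture m n (pvScanL m n)) (pvUFFinal m n picture).1 := by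
  have h := pvBFold m n picture (pvScanL m n) [] 
    (PySem.List.pyRange 0 (pvTot m n) 1, List.replicate (pvTot m n).toNat 1) rfl 
    (by simpa [pvPairsOf] using pvUFS_init (pvTot m n))
  simpa [pvUFFinal, pvBStepF] using h

theorem pvRoot_iff (m n : Int) (picture : List (List Int)) {p q : Int × Int}
    (hp : pvInB m n p) (hq : pvInB m n q) :
    pvRootKey m n picture p = pvRootKey m n picture q ↔ pvReach m n picture p q := by
  have htot : pvTot m n = m * n := pvTot_eq hp
  have hic := pvIdx_cell hp
  have hjc := pvIdx_cell hq
  exact ((pvUFS_final m n picture).hiff _ _ hic.1 (htot ▸ hic.2) hjc.1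
    (htot ▸ hjc.2)).trans (pvECl_iff_reach hp hq)

theorem pvOfList_snoc (l : List Int) (x : Int) :
    PySem.Set.ofList (l ++ [x]) =
      if x ∈ l then PySem.Set.ofList l else PySem.Set.ofList l ++ [x] := by
  have h1 : PySem.Set.ofList (l ++ [x]) = PySem.Set.add (PySem.Set.ofList l) x := by
    simp [PySem.Set.ofList, PySem.Set.add]
  have h2 : PySem.Set.add (PySem.Set.ofList l) x =
      if x ∈ PySem.Set.ofList l then PySem.Set.ofList l else PySem.Set.ofList l ++ [x] := by
    simp [PySem.Set.add]
  rw [h1, h2]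
  by_cases hx : x ∈ l
  · rw [if_pos ((PySem.Set.mem_ofList l x).mpr hx), if_pos hx]
  · rw [if_neg (fun hc => hx ((PySem.Set.mem_ofList l x).mp hc)), if_neg hx]

theorem pvKeys_append (m n : Int) (picture : List (List Int)) (parent : List Int)
    (P : List (Int × Int)) (p : Int × Int) :
    pvKeys m n picture parent (P ++ [p]) =
      pvKeys m n picture parent P ++
        (if pvGet picture p.1 p.2 = 0 then [] else [pvRootD (pvTot m n) parent (pvIdx n p)]) := by
  rw [pvKeys, pvKeys, List.filter_append, List.map_append]
  congr 1
  rw [List.filter_singleton]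
  by_cases h0 : pvGet picture p.1 p.2 = 0
  · rw [if_pos h0]
    have : (!(pvGet picture p.1 p.2 == 0)) = false := by simp [h0]
    rw [this, Bool.cond_eq_ite, if_neg (by simp)]
    rfl
  · rw [if_neg h0]
    have : (!(pvGet picture p.1 p.2 == 0)) = true := by simp [h0]
    rw [this, Bool.cond_eq_ite, if_pos rfl]
    rfl

theorem pvMem_keys {m n : Int} {picture : List (List Int)} {parent : List Int}
    {P : List (Int × Int)} {k : Int} :
    k ∈ pvKeys m n picture parent P ↔
      ∃ q ∈ P, pvGet picture q.1 q.2 ≠ 0 ∧ pvRootD (pvTot m n) parent (pvIdx n q) = k := by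
  rw [pvKeys]
  simp only [List.mem_map, List.mem_filter, Bool.not_eq_eq_eq_not, Bool.not_true,
    beq_eq_false_iff_ne, ne_eq]
  constructor
  · rintro ⟨q, ⟨hq1, hq2⟩, rfl⟩
    exact ⟨q, hq1, hq2, rfl⟩
  · rintro ⟨q, hq1, hq2, rfl⟩
    exact ⟨q, ⟨hq1, hq2⟩, rfl⟩

theorem pvKeys_dedup (m n : Int) (picture : List (List Int)) :
    ∀ (rest P : List (Int × Int)), pvScanL m n = P ++ rest →
      PySem.Set.ofList (pvKeys m n picture (pvUFFinal m n picture).1 P) =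
        (pvFirstsIn m n picture P).map (pvRootKey m n picture) →
      PySem.Set.ofList (pvKeys m n picture (pvUFFinal m n picture).1 (P ++ rest)) =
        (pvFirstsIn m n picture (P ++ rest)).map (pvRootKey m n picture) := by
  intro rest
  induction rest with
  | nil => intro P _ h; simpa using h
  | cons p rest' ih =>
      intro P hsplit h
      have hP := pvScan_split hsplit
      have hp : pvInB m n p := pvMem_scan.mp (by rw [hsplit]; simp)
      have hsplit' : pvScanL m n = (P ++ [p]) ++ rest' := by
        rw [hsplit, List.append_assoc, List.singleton_append]
      have hstep : PySem.Set.ofList (pvKeys m n picture (pvUFFinal m n picture).1 (P ++ [p])) =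
          (pvFirstsIn m n picture (P ++ [p])).map (pvRootKey m n picture) := by
        rw [pvKeys_append, pvFirstsIn_append]
        by_cases h0 : pvGet picture p.1 p.2 = 0
        · rw [if_pos h0, if_neg (fun hf => hf.1 h0), List.append_nil, List.append_nil]
          exact h
        · rw [if_neg h0]
          by_cases hfirst : pvFirst m n picture p
          · rw [if_pos hfirst, pvOfList_snoc, if_neg ?notmem, List.map_append, h]
            · simp [pvRootKey]
            case notmem =>
              intro hmem
              obtain ⟨q, hqP, hq0, hqroot⟩ := pvMem_keys.mp hmem
              have hq := (hP q).mp hqP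
              have hreach : pvReach m n picture q p :=
                (pvRoot_iff m n picture hq.1 hp).mp hqroot
              exact hfirst.2 q hq.1 hq.2 (pvReach_symm hreach)
          · rw [if_neg hfirst, List.append_nil, pvOfList_snoc, if_pos ?ismem]
            · exact h
            case ismem =>
              rw [pvFirst] at hfirst
              push Not at hfirst
              obtain ⟨q, hq1, hq2, hq3⟩ := hfirst h0
              have hq0 : pvGet picture q.1 q.2 ≠ 0 := by
                rcases pvReach_val hq3 with rfl | ⟨_, hv, hz, _⟩
                · exfalso
                  rcases hq2 with hc | ⟨_, hc⟩ <;> omega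
                · rw [hv]; exact h0
              apply pvMem_keys.mpr
              refine ⟨q, (hP q).mpr ⟨hq1, hq2⟩, hq0, ?_⟩
              exact (pvRoot_iff m n picture hq1 hp).mpr (pvReach_symm hq3)
      have := ih (P ++ [p]) hsplit' hstep
      rw [List.append_assoc, List.singleton_append] at this
      simpa using this

theorem pvCount_eq_size (m n : Int) (picture : List (List Int)) {p : Int × Int}
    (hp : pvInB m n p) (hnz : pvGet picture p.1 p.2 ≠ 0) :
    (((pvKeys m n picture (pvUFFinal m n picture).1 (pvScanL m n)).count
        (pvRootKey m n picture p) : Nat) : Int) = pvSizeI m n picture p := by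
  have hnodup : (pvScanL m n).Nodup := by
    have := pvScan_sorted m n
    refine this.imp ?_
    intro a b hab heq
    subst heq
    rcases hab with h | ⟨_, h⟩ <;> omega
  rw [pvKeys, List.count, List.countP_map]
  have hcnt : List.countP ((fun x => x == pvRootKey m n picture p) ∘
      (fun q => pvRootD (pvTot m n) (pvUFFinal m n picture).1 (pvIdx n q)))
      (List.filter (fun q => !(pvGet picture q.1 q.2 == 0)) (pvScanL m n)) =
      (List.filter ((fun x => x == pvRootKey m n picture p) ∘
        (fun q => pvRootD (pvTot m n) (pvUFFinal m n picture).1 (pvIdx n q)))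
        (List.filter (fun q => !(pvGet picture q.1 q.2 == 0)) (pvScanL m n))).length :=
    List.countP_eq_length_filter
  rw [hcnt]
  set L := List.filter ((fun x => x == pvRootKey m n picture p) ∘
      (fun q => pvRootD (pvTot m n) (pvUFFinal m n picture).1 (pvIdx n q)))
      (List.filter (fun q => !(pvGet picture q.1 q.2 == 0)) (pvScanL m n)) with hL
  have hLnodup : L.Nodup := (hnodup.filter _).filter _
  have hset : pvComp m n picture p = ↑L.toFinset := by
    ext q
    simp only [pvComp, Set.mem_setOf_eq, Finset.mem_coe, List.mem_toFinset, hL,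
      List.mem_filter, Function.comp_apply, beq_iff_eq, Bool.not_eq_eq_eq_not,
      Bool.not_true, beq_eq_false_iff_ne, ne_eq]
    constructor
    · intro hr
      have hq : pvInB m n q := pvComp_inB hp hr
      refine ⟨⟨pvMem_scan.mpr hq, ?_⟩, ?_⟩
      · rw [pvComp_val hnz hr]
        exact hnz
      · exact (pvRoot_iff m n picture hq hp).mpr (pvReach_symm hr)
    · rintro ⟨⟨hqs, _⟩, hroot⟩
      exact pvReach_symm ((pvRoot_iff m n picture (pvMem_scan.mp hqs) hp).mp hroot)
  rw [pvSizeI, hset, Set.ncard_coe_finset, List.toFinset_card_of_nodup hLnodup]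

def pvOptMax (acc : Option Int) (x : Int) : Option Int :=
  match acc with
  | none => some x
  | some mx => if mx < x then some x else some mx

theorem pvMaxAux (xs : List Int) :
    ∀ a : Int, xs.foldl pvOptMax (some a) = some (xs.foldl max a) := by
  induction xs with
  | nil => intro a; rfl
  | cons x xs ih =>
      intro a
      rw [List.foldl_cons, List.foldl_cons]
      have hstep : pvOptMax (some a) x = some (max a x) := by
        rw [pvOptMax]
        show (if a < x then some x else some a) = some (max a x)
        rcases le_or_gt x a with h | h
        · rw [if_neg (by omega), max_eq_left h]
        · rw [if_pos h, max_eq_right (by omega)]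
      rw [hstep]
      exact ih (max a x)

theorem pvMax_eq (L : List Int) (hpos : ∀ x ∈ L, 1 ≤ x) :
    (match PySem.List.max? L (fun v => v) with
     | some v => v
     | none => 0) = L.foldl max 0 := by
  cases L with
  | nil => rfl
  | cons x xs =>
      have h1 : PySem.List.max? (x :: xs) (fun v => v) = xs.foldl pvOptMax (some x) := by
        rw [PySem.List.max?, List.foldl_cons]
        show xs.foldl _ (some x) = _
        congr 1
        funext acc y
        cases acc <;> rfl
      rw [h1, pvMaxAux, List.foldl_cons]
      have : max 0 x = x := max_eq_right (by have := hpos x (by simp); omega)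
      rw [this]

theorem pvB_final (m n : Int) (picture : List (List Int)) :
    Solution_alt m n picture =
      [(((pvFirstsIn m n picture (pvScanL m n)).length : Nat) : Int),
       ((pvFirstsIn m n picture (pvScanL m n)).map (pvSizeI m n picture)).foldl max 0] := by
  rw [pvB_form]
  have hcounter : pvCountsFinal m n picture =
      PySem.Dict.counter (pvKeys m n picture (pvUFFinal m n picture).1 (pvScanL m n)) := by
    rw [pvCountsFinal]
    exact pvCounts_eq_counter m n picture (pvUFFinal m n picture).1
  have hdedup := pvKeys_dedup m n picture (pvScanL m n) [] rfl (by simp [pvKeys, pvFirstsIn])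
  rw [List.nil_append] at hdedup
  have hitems := PySem.Dict.items_counter
    (pvKeys m n picture (pvUFFinal m n picture).1 (pvScanL m n))
  have hvalues : (pvCountsFinal m n picture).values =
      (pvFirstsIn m n picture (pvScanL m n)).map (pvSizeI m n picture) := by
    have h1 : (pvCountsFinal m n picture).values =
        (PySem.Dict.counter (pvKeys m n picture (pvUFFinal m n picture).1
          (pvScanL m n))).items.map (·.2) := by
      rw [hcounter]
      rfl
    rw [h1, hitems, List.map_map, hdedup, List.map_map]
    apply List.map_congr_left
    intro p hpF
    have hpmem := List.mem_filter.mp hpF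
    have hpfirst : pvFirst m n picture p :=
      @of_decide_eq_true _ (Classical.propDecidable _) hpmem.2
    have hp : pvInB m n p := pvMem_scan.mp hpmem.1
    exact pvCount_eq_size m n picture hp hpfirst.1
  have hsize : ((pvCountsFinal m n picture).size : Int) =
      (((pvFirstsIn m n picture (pvScanL m n)).length : Nat) : Int) := by
    have h1 : (pvCountsFinal m n picture).size =
        (PySem.Dict.counter (pvKeys m n picture (pvUFFinal m n picture).1
          (pvScanL m n))).items.length := by
      rw [hcounter]
      rfl
    rw [h1, hitems, List.length_map, hdedup, List.length_map]
  have hpos : ∀ x ∈ (pvFirstsIn m n picture (pvScanL m n)).map (pvSizeI m n picture),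
      1 ≤ x := by
    intro x hx
    obtain ⟨p, hpF, rfl⟩ := List.mem_map.mp hx
    have hpmem := List.mem_filter.mp hpF
    have hp : pvInB m n p := pvMem_scan.mp hpmem.1
    rw [pvSizeI]
    have := pvComp_ncard_pos (picture := picture) hp
    omega
  rw [hsize, hvalues, pvMax_eq _ hpos]

theorem pv_main (m n : Int) (picture : List (List Int)) :
    Solution m n picture = Solution_alt m n picture := by
  rw [pvA_final, pvB_final]

-- ===== VERDICT (by name: the statement is the Claim_ definition above) =====
theorem Solution_spec : Claim_equal_Solution := by
  intro m n picture _ _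
  unfold Spec_Solution
  exact pv_main m n picture
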